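-- pv_equiv track=rewrite | github.com/yskang/AlgorithmPractice | baekjoon/python/travel_of_sanguen_9372.py | solution
-- ===== SOURCE A (Python) =====
-- class UnionFind:
--     def __init__(self, max_count):
--         self.p = [-1 for _ in range(max_count)]
--
--     def find(self, a: int):
--         if self.p[a] < 0:
--             return a
--         self.p[a] = self.find(self.p[a])
--         return self.p[a]
--
--     def union(self, a: int, b: int):
--         a = self.find(a)
--         b = self.find(b)
--         if a == b:
--             return False
--         if self.p[a] < self.p[b]:
--             self.p[a] += self.p[b]
--             self.p[b] = a
--         else:
--             self.p[b] += self.p[a]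
--             self.p[a] = b
--         return True
--
--     def size(self, a: int):
--         return -self.p[self.find(a)]
--
-- def solution(n: int, m: int, airlines: list):
--     count = 0
--     uf = UnionFind(n+1)
--     for a, b in airlines:
--         if uf.find(a) != uf.find(b):
--             uf.union(a, b)
--             count += 1
--     return count
-- ===== SOURCE B (Python) =====
-- def solution(n: int, m: int, airlines: list):
--     comp = list(range(n + 1))
--     count = 0
--     for a, b in airlines:
--         ca, cb = comp[a], comp[b]
--         if ca != cb:
--             comp = [ca if c == cb else c for c in comp]
--             count += 1
--     return count
-- ===== Notes on version B (the rewrite author's own statement) =====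
-- stated objective: simpler
-- what changed: Replaces the recursive union-find (parent array, path compression, union by size) by a flat component-label array: each node stores its component label directly and a uniting edge rewrites one label in a single comprehension pass, so B has no class, no recursion and no find/union helpers.
-- outside the precondition, e.g. on solution(2, 1, [(-1, 2)]): A returns 1, B returns 0; on solution(1, 2, [(-1, -2), (-1, -2)]): A returns 2, B returns 1
import Mathlib
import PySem

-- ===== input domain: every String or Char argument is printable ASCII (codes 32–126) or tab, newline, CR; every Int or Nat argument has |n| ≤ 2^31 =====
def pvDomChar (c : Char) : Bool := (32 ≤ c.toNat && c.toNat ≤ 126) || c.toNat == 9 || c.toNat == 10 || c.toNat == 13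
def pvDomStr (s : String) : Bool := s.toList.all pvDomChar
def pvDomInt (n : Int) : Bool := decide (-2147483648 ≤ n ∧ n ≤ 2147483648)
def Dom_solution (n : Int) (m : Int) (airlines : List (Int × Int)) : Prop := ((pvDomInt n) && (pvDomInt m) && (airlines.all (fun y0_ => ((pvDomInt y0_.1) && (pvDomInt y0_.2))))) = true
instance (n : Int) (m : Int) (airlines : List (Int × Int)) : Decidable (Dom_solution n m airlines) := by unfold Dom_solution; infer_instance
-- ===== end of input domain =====

-- B replaces the recursive union-find by a flat component-label array (simpler: no class, no
-- recursion, no find/union helpers); proved equal to A on inputs whose endpoint values do not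
-- collide modulo n+1 (Python's negative-index wraparound aliasing two values to one cell).

-- ===== PORT A =====
-- UnionFind.find, with a fuel counter only to make the recursion structural (Python recurses on
-- the parent chain); fuel = array length always suffices on admitted inputs (proved below).
def ufFind : Nat → List Int → Int → List Int × Int
  | 0, p, a => (p, a)
  | fuel+1, p, a =>
    let pa := PySem.List.pyGetD p a 0          -- self.p[a] (in range under Pre_)
    if pa < 0 then (p, a)
    else
      let r := ufFind fuel p pa                -- self.find(self.p[a])
      (PySem.List.pySetD r.1 a r.2, r.2)       -- self.p[a] = …; return self.p[a]

-- UnionFind.union; its boolean result is ignored by solution, so the port returns the array state.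
def ufUnion (p : List Int) (a b : Int) : List Int :=
  let fa := ufFind p.length p a                -- a = self.find(a)
  let fb := ufFind fa.1.length fa.1 b          -- b = self.find(b)
  if fa.2 = fb.2 then fb.1
  else
    let pa := PySem.List.pyGetD fb.1 fa.2 0
    let pb := PySem.List.pyGetD fb.1 fb.2 0
    if pa < pb then
      PySem.List.pySetD (PySem.List.pySetD fb.1 fa.2 (pa + pb)) fb.2 fa.2
    else
      PySem.List.pySetD (PySem.List.pySetD fb.1 fb.2 (pb + pa)) fa.2 fb.2

def solution (n : Int) (m : Int) (airlines : List (Int × Int)) : Int :=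
  (airlines.foldl
    (fun st ab =>
      let fa := ufFind st.1.length st.1 ab.1          -- uf.find(a)
      let fb := ufFind fa.1.length fa.1 ab.2          -- uf.find(b)
      if fa.2 ≠ fb.2 then (ufUnion fb.1 ab.1 ab.2, st.2 + 1)
      else (fb.1, st.2))
    ((PySem.List.pyRange 0 (n+1) 1).map (fun _ => (-1 : Int)), (0 : Int))).2

-- ===== PORT B =====
def solution_alt (n : Int) (m : Int) (airlines : List (Int × Int)) : Int :=
  (airlines.foldl
    (fun st ab =>
      let ca := PySem.List.pyGetD st.1 ab.1 0
      let cb := PySem.List.pyGetD st.1 ab.2 0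
      if ca ≠ cb then (st.1.map (fun c => if c = cb then ca else c), st.2 + 1)
      else (st.1, st.2))
    (PySem.List.pyRange 0 (n+1) 1, (0 : Int))).2

-- ===== PRECONDITION & SPEC =====
-- the endpoint values an airlines list mentions, in order
def pvVals (airlines : List (Int × Int)) : List Int := airlines.flatMap (fun ab => [ab.1, ab.2])
-- Pre_ excludes endpoints outside [-(n+1), n] (A raises IndexError) and inputs where two
-- distinct endpoint values address the same parent-array cell modulo n+1 (or a negative value
-- is used twice), on which A's negative-index wraparound corrupts its parent array and its
-- value (or RecursionError) is an accident of the representation.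
def Pre_solution (n : Int) (m : Int) (airlines : List (Int × Int)) : Prop :=
  (∀ v ∈ pvVals airlines, -(n+1) ≤ v ∧ v ≤ n) ∧
  (pvVals airlines).Pairwise (fun u v => (u = v → 0 ≤ u) ∧ (u ≠ v → ¬ ((n+1) ∣ (u - v))))
instance (n : Int) (m : Int) (airlines : List (Int × Int)) : Decidable (Pre_solution n m airlines) := by unfold Pre_solution; infer_instance
def pvWitness_solution : Int × Int × (List (Int × Int)) := (2, 2, [(0, 1), (1, 2)])
def Spec_solution (n : Int) (m : Int) (airlines : List (Int × Int)) (out : Int) : Prop := out = solution_alt n m airlines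
instance (n : Int) (m : Int) (airlines : List (Int × Int)) (out : Int) : Decidable (Spec_solution n m airlines out) := by unfold Spec_solution; infer_instance

-- ===== CLAIM (what is proved, stated in full; the proofs are below) =====
def Claim_equal_solution : Prop := ∀ (n : Int) (m : Int) (airlines : List (Int × Int)), Dom_solution n m airlines → Pre_solution n m airlines → Spec_solution n m airlines (solution n m airlines)


-- ===== LEMMAS AND PROOFS =====

-- `PvReach p x r`: starting at (valid, nonnegative) index x, following parent pointers in the
-- array p reaches the root r (a cell holding a negative value).
inductive PvReach (p : List Int) : Int → Int → Prop
  | root (x v : Int) : 0 ≤ x → PySem.List.pyGet? p x = some v → v < 0 → PvReach p x x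
  | step (x v r : Int) : 0 ≤ x → PySem.List.pyGet? p x = some v → 0 ≤ v → PvReach p v r →
      PvReach p x r

-- `PvPath p x y`: y occurs on the parent chain starting at x.
inductive PvPath (p : List Int) : Int → Int → Prop
  | refl (x : Int) : PvPath p x x
  | step (x v y : Int) : PySem.List.pyGet? p x = some v → 0 ≤ v → PvPath p v y → PvPath p x y

-- fuelled root computation (the value `ufFind` returns, without the compression writes)
def pvRootI : Nat → List Int → Int → Option Int
  | 0, _, _ => none
  | f+1, p, x =>
    match PySem.List.pyGet? p x with
    | none => none
    | some v => if v < 0 then some x else pvRootI f p v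

theorem pvIdx_lt (p : List Int) (x v : Int) (h0 : 0 ≤ x)
    (h : PySem.List.pyGet? p x = some v) : x < (p.length : Int) := by
  rw [PySem.List.pyGet?_of_nonneg p h0] at h
  obtain ⟨h1, -⟩ := List.getElem?_eq_some_iff.mp h
  omega

theorem pvReach_root_spec (p : List Int) (x r : Int) (h : PvReach p x r) :
    ∃ w, 0 ≤ r ∧ PySem.List.pyGet? p r = some w ∧ w < 0 := by
  induction h with
  | root x v hx hg hv => exact ⟨v, hx, hg, hv⟩
  | step x v r hx hg hv hr ih => exact ih

theorem pvReach_det (p : List Int) (x r s : Int) (h1 : PvReach p x r) (h2 : PvReach p x s) :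
    r = s := by
  induction h1 generalizing s with
  | root x v hx hg hv =>
    cases h2 with
    | root => rfl
    | step y v' r' hy hg' hv' _ => rw [hg] at hg'; cases hg'; omega
  | step x v r hx hg hv hr ih =>
    cases h2 with
    | root y v' hy hg' hv' => rw [hg] at hg'; cases hg'; omega
    | step y v' r' hy hg' hv' hr' => rw [hg] at hg'; cases hg'; exact ih _ hr'

theorem pvRootI_reach (f : Nat) (p : List Int) (x r : Int) (h0 : 0 ≤ x)
    (h : pvRootI f p x = some r) : PvReach p x r := by
  induction f generalizing x with
  | zero => simp [pvRootI] at h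
  | succ f ih =>
    unfold pvRootI at h
    cases hg : PySem.List.pyGet? p x with
    | none => rw [hg] at h; simp at h
    | some v =>
      rw [hg] at h
      by_cases hv : v < 0
      · simp [hv] at h; subst h; exact PvReach.root x v h0 hg hv
      · simp [hv] at h
        exact PvReach.step x v r h0 hg (by omega) (ih v (by omega) h)

theorem pvReach_rootI (p : List Int) (x r : Int) (h : PvReach p x r) :
    ∃ f, pvRootI f p x = some r := by
  induction h with
  | root x v hx hg hv => exact ⟨1, by simp [pvRootI, hg, hv]⟩
  | step x v r hx hg hv hr ih =>
    obtain ⟨f, hf⟩ := ih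
    exact ⟨f + 1, by simp [pvRootI, hg, hf]; omega⟩

theorem pvPath_suffix (p : List Int) (x y : Int) (hp : PvPath p x y) :
    ∀ f r, pvRootI f p x = some r → ∃ g, g ≤ f ∧ pvRootI g p y = some r := by
  induction hp with
  | refl x => exact fun f r h => ⟨f, le_rfl, h⟩
  | step x v y hg hv _ ih =>
    intro f r h
    cases f with
    | zero => simp [pvRootI] at h
    | succ f =>
      unfold pvRootI at h
      rw [hg] at h
      simp [show ¬ v < 0 by omega] at h
      obtain ⟨g, hg1, hg2⟩ := ih f r h
      exact ⟨g, by omega, hg2⟩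

theorem pv_no_cycle (p : List Int) (x v : Int)
    (hg : PySem.List.pyGet? p x = some v) (hv : 0 ≤ v) (hp : PvPath p v x) :
    ∀ f r, pvRootI f p x ≠ some r := by
  intro f
  induction f using Nat.strong_induction_on with
  | _ f ih =>
    intro r h
    cases f with
    | zero => simp [pvRootI] at h
    | succ f =>
      unfold pvRootI at h
      rw [hg] at h
      simp [show ¬ v < 0 by omega] at h
      obtain ⟨g, hg1, hg2⟩ := pvPath_suffix p v x hp f r h
      exact ih g (by omega) r hg2

theorem pv_fuel_card (p : List Int) :
    ∀ (f : Nat) (S : Finset Int) (x r : Int), 0 ≤ x →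
      (∀ s ∈ S, 0 ≤ s ∧ s < (p.length : Int)) → (∀ s ∈ S, ¬ PvPath p x s) →
      pvRootI f p x = some r → pvRootI (p.length - S.card) p x = some r := by
  intro f
  induction f with
  | zero => intro S x r _ _ _ h; simp [pvRootI] at h
  | succ f ih =>
    intro S x r h0 hSb hSp h
    unfold pvRootI at h
    cases hg : PySem.List.pyGet? p x with
    | none => rw [hg] at h; simp at h
    | some v =>
      rw [hg] at h
      have hxlt : x < (p.length : Int) := pvIdx_lt p x v h0 hg
      have hxS : x ∉ S := fun hx => hSp x hx (PvPath.refl x)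
      have hcard : S.card < p.length := by
        have hsub : insert x S ⊆ Finset.Ico (0 : Int) (p.length : Int) := by
          intro s hs
          rcases Finset.mem_insert.mp hs with rfl | hs
          · exact Finset.mem_Ico.mpr ⟨h0, hxlt⟩
          · exact Finset.mem_Ico.mpr ⟨(hSb s hs).1, (hSb s hs).2⟩
        have h1 := Finset.card_le_card hsub
        rw [Finset.card_insert_of_notMem hxS] at h1
        have h2 : (Finset.Ico (0 : Int) (p.length : Int)).card = p.length := by
          rw [Int.card_Ico]; omega
        omega
      obtain ⟨k, hk⟩ : ∃ k, p.length - S.card = k + 1 := ⟨p.length - S.card - 1, by omega⟩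
      rw [hk]
      unfold pvRootI
      rw [hg]
      by_cases hv : v < 0
      · simp only [if_pos hv] at h ⊢; exact h
      · simp only [if_neg hv] at h ⊢
        have hS' : ∀ s ∈ insert x S, 0 ≤ s ∧ s < (p.length : Int) := by
          intro s hs
          rcases Finset.mem_insert.mp hs with rfl | hs
          · exact ⟨h0, hxlt⟩
          · exact hSb s hs
        have hP' : ∀ s ∈ insert x S, ¬ PvPath p v s := by
          intro s hs hpath
          rcases Finset.mem_insert.mp hs with rfl | hs
          · exact pv_no_cycle p s v hg (by omega) hpath (f+1) r (by
              unfold pvRootI; rw [hg]; simp [hv]; exact h)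
          · exact hSp s hs (PvPath.step x v s hg (by omega) hpath)
        have := ih (insert x S) v r (by omega) hS' hP' h
        rw [Finset.card_insert_of_notMem hxS] at this
        have hk2 : p.length - (S.card + 1) = k := by omega
        rw [hk2] at this
        exact this

theorem pvReach_rootI_len (p : List Int) (x r : Int) (h : PvReach p x r) :
    pvRootI p.length p x = some r := by
  obtain ⟨f, hf⟩ := pvReach_rootI p x r h
  have := pv_fuel_card p f ∅ x r (by cases h <;> assumption) (by simp) (by simp) hf
  simpa using this

-- reading a cell of a written array, on nonnegative indices
theorem pvGet_set (q : List Int) (a v x : Int) (h0a : 0 ≤ a) (hlt : a.toNat < q.length)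
    (h0x : 0 ≤ x) :
    PySem.List.pyGet? (PySem.List.pySetD q a v) x =
      if x = a then some v else PySem.List.pyGet? q x := by
  rw [PySem.List.pySetD_of_nonneg q v h0a, PySem.List.pyGet?_of_nonneg _ h0x,
    PySem.List.pyGet?_of_nonneg _ h0x, List.getElem?_set]
  by_cases hx : x = a
  · subst hx; simp [hlt]
  · have : a.toNat ≠ x.toNat := by omega
    simp [this, hx]

-- path compression write: setting p[a] to a's own root changes no reachability fact
theorem pv_compress (q : List Int) (a r : Int) (h0 : 0 ≤ a) (hne : a ≠ r)
    (hr : PvReach q a r) (hlt : a.toNat < q.length) :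
    ∀ x s, PvReach (PySem.List.pySetD q a r) x s ↔ PvReach q x s := by
  obtain ⟨w0, h0r, hgr, hw0⟩ := pvReach_root_spec q a r hr
  intro x s
  constructor
  · intro h
    induction h with
    | root y vv hy hgy hvy =>
      rw [pvGet_set q a r y h0 hlt hy] at hgy
      by_cases hya : y = a
      · rw [if_pos hya] at hgy; cases hgy; omega
      · rw [if_neg hya] at hgy; exact PvReach.root y vv hy hgy hvy
    | step y vv ss hy hgy hvy hrec ih =>
      rw [pvGet_set q a r y h0 hlt hy] at hgy
      by_cases hya : y = a
      · rw [if_pos hya] at hgy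
        cases hgy
        subst hya
        have hss : ss = r := pvReach_det q r ss r ih (PvReach.root r w0 h0r hgr hw0)
        subst hss; exact hr
      · rw [if_neg hya] at hgy
        exact PvReach.step y vv ss hy hgy hvy ih
  · intro h
    induction h with
    | root y vv hy hgy hvy =>
      by_cases hya : y = a
      · subst hya
        have : y = r := pvReach_det q y y r (PvReach.root y vv hy hgy hvy) hr
        omega
      · refine PvReach.root y vv hy ?_ hvy
        rw [pvGet_set q a r y h0 hlt hy, if_neg hya]; exact hgy
    | step y vv ss hy hgy hvy hrec ih =>
      by_cases hya : y = a
      · subst hya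
        have hss : ss = r := pvReach_det q y ss r (PvReach.step y vv ss hy hgy hvy hrec) hr
        rw [hss]
        refine PvReach.step y r r hy ?_ h0r ?_
        · rw [pvGet_set q y r y h0 hlt hy, if_pos rfl]
        · refine PvReach.root r w0 h0r ?_ hw0
          rw [pvGet_set q y r r h0 hlt h0r, if_neg (fun hh => hne hh.symm)]; exact hgr
      · refine PvReach.step y vv ss hy ?_ hvy ih
        rw [pvGet_set q a r y h0 hlt hy, if_neg hya]; exact hgy

-- linking two roots: class of w is merged into class of u, all other classes unchanged
theorem pv_link (q : List Int) (u w su sw val : Int)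
    (h0u : 0 ≤ u) (h0w : 0 ≤ w) (hne : u ≠ w)
    (hgu : PySem.List.pyGet? q u = some su) (hsu : su < 0)
    (hgw : PySem.List.pyGet? q w = some sw) (hsw : sw < 0)
    (hval : val < 0) :
    ∀ x s, PvReach (PySem.List.pySetD (PySem.List.pySetD q u val) w u) x s ↔
      ∃ s', PvReach q x s' ∧ s = (if s' = w then u else s') := by
  have hult : u.toNat < q.length := by
    have := pvIdx_lt q u su h0u hgu; omega
  have hwlt : w.toNat < (PySem.List.pySetD q u val).length := by
    rw [PySem.List.length_pySetD]; have := pvIdx_lt q w sw h0w hgw; omega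
  have hget : ∀ z : Int, 0 ≤ z →
      PySem.List.pyGet? (PySem.List.pySetD (PySem.List.pySetD q u val) w u) z =
        if z = w then some u else if z = u then some val else PySem.List.pyGet? q z := by
    intro z hz
    rw [pvGet_set _ w u z h0w hwlt hz]
    by_cases hzw : z = w
    · simp [hzw]
    · rw [if_neg hzw, if_neg hzw, pvGet_set q u val z h0u hult hz]
  intro x s
  constructor
  · intro h
    induction h with
    | root y vv hy hgy hvy =>
      rw [hget y hy] at hgy
      by_cases hyw : y = w
      · rw [if_pos hyw] at hgy; cases hgy; omega
      · rw [if_neg hyw] at hgy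
        by_cases hyu : y = u
        · subst hyu
          exact ⟨y, PvReach.root y su hy hgu hsu, by rw [if_neg hyw]⟩
        · rw [if_neg hyu] at hgy
          exact ⟨y, PvReach.root y vv hy hgy hvy, by rw [if_neg hyw]⟩
    | step y vv ss hy hgy hvy hrec ih =>
      rw [hget y hy] at hgy
      by_cases hyw : y = w
      · subst hyw
        rw [if_pos rfl] at hgy
        cases hgy
        obtain ⟨s', hs', hss⟩ := ih
        have hsu' : s' = u := pvReach_det q u s' u hs' (PvReach.root u su h0u hgu hsu)
        subst hsu'
        refine ⟨y, PvReach.root y sw hy hgw hsw, ?_⟩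
        rw [if_pos rfl, hss]
        split_ifs <;> rfl
      · rw [if_neg hyw] at hgy
        by_cases hyu : y = u
        · rw [if_pos hyu] at hgy; cases hgy; omega
        · rw [if_neg hyu] at hgy
          obtain ⟨s', hs', hseq⟩ := ih
          exact ⟨s', PvReach.step y vv s' hy hgy hvy hs', hseq⟩
  · rintro ⟨s', hs', rfl⟩
    induction hs' with
    | root y vv hy hgy hvy =>
      by_cases hyw : y = w
      · subst hyw
        rw [if_pos rfl]
        refine PvReach.step y u u hy ?_ h0u ?_
        · rw [hget y hy, if_pos rfl]
        · refine PvReach.root u val h0u ?_ hval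
          rw [hget u h0u, if_neg hne, if_pos rfl]
      · by_cases hyu : y = u
        · subst hyu
          rw [if_neg hyw]
          refine PvReach.root y val hy ?_ hval
          rw [hget y hy, if_neg hyw, if_pos rfl]
        · rw [if_neg hyw]
          refine PvReach.root y vv hy ?_ hvy
          rw [hget y hy, if_neg hyw, if_neg hyu]; exact hgy
    | step y vv ss hy hgy hvy hrec ih =>
      have hyw : y ≠ w := by rintro rfl; rw [hgy] at hgw; cases hgw; omega
      have hyu : y ≠ u := by rintro rfl; rw [hgy] at hgu; cases hgu; omega
      refine PvReach.step y vv _ hy ?_ hvy ih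
      rw [hget y hy, if_neg hyw, if_neg hyu]; exact hgy

-- ufFind returns the root and changes no reachability fact
theorem ufFind_spec : ∀ (f : Nat) (p : List Int) (a r : Int), 0 ≤ a →
    pvRootI f p a = some r →
    (ufFind f p a).2 = r ∧ (ufFind f p a).1.length = p.length ∧
      (∀ x s, PvReach (ufFind f p a).1 x s ↔ PvReach p x s) := by
  intro f
  induction f with
  | zero => intro p a r _ h; simp [pvRootI] at h
  | succ f ih =>
    intro p a r h0 h
    unfold pvRootI at h
    cases hg : PySem.List.pyGet? p a with
    | none => rw [hg] at h; simp at h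
    | some v =>
      rw [hg] at h
      have hpa : PySem.List.pyGetD p a 0 = v := by simp [PySem.List.pyGetD, hg]
      by_cases hv : v < 0
      · simp [hv] at h
        subst h
        simp [ufFind, hpa, hv]
      · simp [hv] at h
        obtain ⟨ih2, ihlen, ihequiv⟩ := ih p v r (by omega) h
        have hra : PvReach p a r :=
          PvReach.step a v r h0 hg (by omega) (pvRootI_reach f p v r (by omega) h)
        obtain ⟨w, h0r, hgr, hw⟩ := pvReach_root_spec p a r hra
        have hner : a ≠ r := by rintro rfl; rw [hg] at hgr; cases hgr; omega
        have halt : a.toNat < (ufFind f p v).1.length := by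
          have := pvIdx_lt p a v h0 hg; omega
        have hcomp := pv_compress (ufFind f p v).1 a r h0 hner
          ((ihequiv a r).mpr hra) halt
        refine ⟨?_, ?_, ?_⟩
        · simp [ufFind, hpa, hv, ih2]
        · simp [ufFind, hpa, hv, PySem.List.length_pySetD, ihlen]
        · intro x s
          simp only [ufFind, hpa]
          rw [if_neg (by omega)]
          simp only [ih2]
          exact (hcomp x s).trans (ihequiv x s)

-- index wrapping: a negative in-range index addresses cell i + len
theorem pvIdx_wrap (nn : Nat) (v : Int) (h1 : -(nn : Int) ≤ v) (h2 : v < 0) :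
    PySem.List.pyIdx? nn v = PySem.List.pyIdx? nn (v + nn) := by
  unfold PySem.List.pyIdx?
  rw [if_neg (by omega), if_pos (by omega), if_pos (by omega), if_pos (by omega)]
  congr 1
  omega

theorem pvGet_wrap (p : List Int) (v : Int) (h1 : -(p.length : Int) ≤ v) (h2 : v < 0) :
    PySem.List.pyGet? p v = PySem.List.pyGet? p (v + p.length) := by
  unfold PySem.List.pyGet?
  rw [pvIdx_wrap p.length v h1 h2]

theorem pvSetD_wrap (p : List Int) (v x : Int) (h1 : -(p.length : Int) ≤ v) (h2 : v < 0) :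
    PySem.List.pySetD p v x = PySem.List.pySetD p (v + p.length) x := by
  unfold PySem.List.pySetD PySem.List.pySet?
  rw [pvIdx_wrap p.length v h1 h2]

-- what Python's find returns from an arbitrary (possibly negative) start index
inductive GReach (p : List Int) : Int → Int → Prop
  | root (x v : Int) : PySem.List.pyGet? p x = some v → v < 0 → GReach p x x
  | step (x v r : Int) : PySem.List.pyGet? p x = some v → 0 ≤ v → PvReach p v r →
      GReach p x r

theorem gReach_det (p : List Int) (x r s : Int) (h1 : GReach p x r) (h2 : GReach p x s) :
    r = s := by
  cases h1 with
  | root v hg hv =>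
    cases h2 with
    | root => rfl
    | step v' r' hg' hv' hr' => rw [hg] at hg'; cases hg'; omega
  | step v r' hg hv hr =>
    cases h2 with
    | root v' hg' hv' => rw [hg] at hg'; cases hg'; omega
    | step v' r'' hg' hv' hr' => rw [hg] at hg'; cases hg'; exact pvReach_det p v r s hr hr'

theorem gReach_iff_pvReach (p : List Int) (x r : Int) (h0 : 0 ≤ x) :
    GReach p x r ↔ PvReach p x r := by
  constructor
  · intro h
    cases h with
    | root v hg hv => exact PvReach.root x v h0 hg hv
    | step v r' hg hv hr => exact PvReach.step x v r h0 hg hv hr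
  · intro h
    induction h with
    | root y vv hy hgy hvy => exact GReach.root y vv hgy hvy
    | step y vv ss hy hgy hvy hrec ih => exact GReach.step y vv ss hgy hvy hrec

theorem ufFind_len (f : Nat) : ∀ (p : List Int) (a : Int), (ufFind f p a).1.length = p.length := by
  induction f with
  | zero => intro p a; rfl
  | succ f ih =>
    intro p a
    by_cases hv : PySem.List.pyGetD p a 0 < 0
    · simp [ufFind, hv]
    · simp [ufFind, hv, PySem.List.length_pySetD, ih]

-- find returns immediately on an index whose cell holds a negative value
theorem ufFind_root_eval (f : Nat) (p : List Int) (a w : Int)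
    (hg : PySem.List.pyGet? p a = some w) (hw : w < 0) :
    ufFind (f + 1) p a = (p, a) := by
  have : PySem.List.pyGetD p a 0 = w := by simp [PySem.List.pyGetD, hg]
  simp [ufFind, this, hw]

-- find never writes over a cell holding a negative value (compression writes only
-- over nonnegative entries)
theorem ufFind_keeps_neg (f : Nat) : ∀ (p : List Int) (a : Int), 0 ≤ a →
    ∀ (c w0 : Int), 0 ≤ c → PySem.List.pyGet? p c = some w0 → w0 < 0 →
    PySem.List.pyGet? (ufFind f p a).1 c = some w0 := by
  induction f with
  | zero => intro p a _ c w0 _ h _; exact h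
  | succ f ih =>
    intro p a h0a c w0 h0c hgc hw0
    cases hga : PySem.List.pyGet? p a with
    | none =>
      have h0 : PySem.List.pyGetD p a 0 = 0 := by simp [PySem.List.pyGetD, hga]
      have hinv : ¬ PySem.Raise.InRange p.length a := by
        rw [← PySem.List.pyGet?_eq_none_iff]; exact hga
      have hset : ∀ (q : List Int) (v : Int), q.length = p.length →
          PySem.List.pySetD q a v = q := by
        intro q v hql
        unfold PySem.List.pySetD
        rw [show PySem.List.pySet? q a v = none from
          (PySem.List.pySet?_eq_none_iff q a v).mpr (by rw [hql]; exact hinv)]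
        rfl
      simp only [ufFind, h0]
      rw [if_neg (by omega)]
      simp only
      rw [hset _ _ (ufFind_len f p 0)]
      exact ih p 0 (by omega) c w0 h0c hgc hw0
    | some pa =>
      have hpa : PySem.List.pyGetD p a 0 = pa := by simp [PySem.List.pyGetD, hga]
      by_cases hv : pa < 0
      · simp [ufFind, hpa, hv]; exact hgc
      · have hne : c ≠ a := by rintro rfl; rw [hga] at hgc; cases hgc; omega
        have hq := ih p pa (by omega) c w0 h0c hgc hw0
        have halt : a.toNat < (ufFind f p pa).1.length := by
          rw [ufFind_len]
          have := pvIdx_lt p a pa h0a hga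
          omega
        simp only [ufFind, hpa]
        rw [if_neg (by omega)]
        simp only
        rw [pvGet_set (ufFind f p pa).1 a _ c h0a halt h0c, if_neg hne]
        exact hq

-- rewriting a negative cell value with another negative value changes no reachability fact
theorem pv_set_neg (q : List Int) (c w w0 : Int) (h0c : 0 ≤ c) (hlt : c.toNat < q.length)
    (hold : PySem.List.pyGet? q c = some w0) (hw0 : w0 < 0) (hw : w < 0) :
    ∀ x s, PvReach (PySem.List.pySetD q c w) x s ↔ PvReach q x s := by
  intro x s
  constructor
  · intro h
    induction h with
    | root y vv hy hgy hvy =>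
      rw [pvGet_set q c w y h0c hlt hy] at hgy
      by_cases hyc : y = c
      · subst hyc; exact PvReach.root y w0 hy hold hw0
      · rw [if_neg hyc] at hgy; exact PvReach.root y vv hy hgy hvy
    | step y vv ss hy hgy hvy hrec ih =>
      rw [pvGet_set q c w y h0c hlt hy] at hgy
      by_cases hyc : y = c
      · rw [if_pos hyc] at hgy; cases hgy; omega
      · rw [if_neg hyc] at hgy; exact PvReach.step y vv ss hy hgy hvy ih
  · intro h
    induction h with
    | root y vv hy hgy hvy =>
      by_cases hyc : y = c
      · refine PvReach.root y w hy ?_ hw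
        rw [pvGet_set q c w y h0c hlt hy, if_pos hyc]
      · refine PvReach.root y vv hy ?_ hvy
        rw [pvGet_set q c w y h0c hlt hy, if_neg hyc]; exact hgy
    | step y vv ss hy hgy hvy hrec ih =>
      by_cases hyc : y = c
      · rw [hyc, hold] at hgy; cases hgy; omega
      · refine PvReach.step y vv ss hy ?_ hvy ih
        rw [pvGet_set q c w y h0c hlt hy, if_neg hyc]; exact hgy

-- writing anything into a root cell that nothing else reaches changes no reachability fact
-- of any other start index
theorem pv_set_avoid (q : List Int) (c val w0 : Int) (h0c : 0 ≤ c) (hlt : c.toNat < q.length)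
    (hold : PySem.List.pyGet? q c = some w0) (hw0 : w0 < 0)
    (havoid : ∀ x s, 0 ≤ x → x ≠ c → PvReach q x s → s ≠ c) :
    ∀ x s, x ≠ c → (PvReach (PySem.List.pySetD q c val) x s ↔ PvReach q x s) := by
  have hcc : PvReach q c c := PvReach.root c w0 h0c hold hw0
  have dir1 : ∀ x s, PvReach (PySem.List.pySetD q c val) x s → x ≠ c → PvReach q x s := by
    intro x s h
    induction h with
    | root y vv hy hgy hvy =>
      intro hyc
      rw [pvGet_set q c val y h0c hlt hy, if_neg hyc] at hgy
      exact PvReach.root y vv hy hgy hvy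
    | step y vv ss hy hgy hvy hrec ih =>
      intro hyc
      rw [pvGet_set q c val y h0c hlt hy, if_neg hyc] at hgy
      have hvc : vv ≠ c := by
        rintro rfl
        exact havoid y vv hy hyc (PvReach.step y vv vv hy hgy hvy hcc) rfl
      exact PvReach.step y vv ss hy hgy hvy (ih hvc)
  have dir2 : ∀ x s, PvReach q x s → x ≠ c → PvReach (PySem.List.pySetD q c val) x s := by
    intro x s h
    induction h with
    | root y vv hy hgy hvy =>
      intro hyc
      refine PvReach.root y vv hy ?_ hvy
      rw [pvGet_set q c val y h0c hlt hy, if_neg hyc]; exact hgy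
    | step y vv ss hy hgy hvy hrec ih =>
      intro hyc
      have hvc : vv ≠ c := by
        rintro rfl
        exact havoid y vv hy hyc (PvReach.step y vv vv hy hgy hvy hcc) rfl
      refine PvReach.step y vv ss hy ?_ hvy (ih hvc)
      rw [pvGet_set q c val y h0c hlt hy, if_neg hyc]; exact hgy
  exact fun x s hxc => ⟨fun h => dir1 x s h hxc, fun h => dir2 x s h hxc⟩

theorem pvMerge_eq_iff (u w s1 s2 : Int) (hne : u ≠ w) :
    ((if s1 = w then u else s1) = (if s2 = w then u else s2)) ↔
      (s1 = s2 ∨ (s1 = w ∧ s2 = u) ∨ (s1 = u ∧ s2 = w)) := by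
  split_ifs with h1 h2 h2 <;> constructor <;> intro h <;> omega

-- the two loop bodies, names for the literal fold lambdas of the ports
def pvStepA (st : List Int × Int) (ab : Int × Int) : List Int × Int :=
  let fa := ufFind st.1.length st.1 ab.1
  let fb := ufFind fa.1.length fa.1 ab.2
  if fa.2 ≠ fb.2 then (ufUnion fb.1 ab.1 ab.2, st.2 + 1) else (fb.1, st.2)

def pvStepB (st : List Int × Int) (ab : Int × Int) : List Int × Int :=
  let ca := PySem.List.pyGetD st.1 ab.1 0
  let cb := PySem.List.pyGetD st.1 ab.2 0
  if ca ≠ cb then (st.1.map (fun c => if c = cb then ca else c), st.2 + 1) else (st.1, st.2)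

theorem pv_part_iff (ra rb ca cb rx ry cx cy U W : Int) (hrr : ra ≠ rb) (hcc : ca ≠ cb)
    (hxy : rx = ry ↔ cx = cy) (hxa : rx = ra ↔ cx = ca) (hxb : rx = rb ↔ cx = cb)
    (hya : ry = ra ↔ cy = ca) (hyb : ry = rb ↔ cy = cb)
    (hUW : (U = ra ∧ W = rb) ∨ (U = rb ∧ W = ra)) :
    ((if rx = W then U else rx) = (if ry = W then U else ry)) ↔
      ((if cx = cb then ca else cx) = (if cy = cb then ca else cy)) := by
  have hUWne : U ≠ W := by rcases hUW with ⟨rfl, rfl⟩ | ⟨rfl, rfl⟩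
                           · exact hrr
                           · exact hrr.symm
  rw [pvMerge_eq_iff U W rx ry hUWne, pvMerge_eq_iff ca cb cx cy hcc]
  rcases hUW with ⟨rfl, rfl⟩ | ⟨rfl, rfl⟩ <;> tauto

theorem pv_init_get (n x v : Int) (hx : 0 ≤ x)
    (h : PySem.List.pyGet? ((PySem.List.pyRange 0 (n+1) 1).map (fun _ => (-1 : Int))) x
      = some v) : v = -1 := by
  rw [PySem.List.pyGet?_of_nonneg _ hx, List.getElem?_map] at h
  cases hr : (PySem.List.pyRange 0 (n+1) 1)[x.toNat]? with
  | none => rw [hr] at h; simp at h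
  | some w => rw [hr] at h; simp at h; omega

theorem pv_reach_id (p : List Int)
    (hneg : ∀ x v : Int, 0 ≤ x → PySem.List.pyGet? p x = some v → v < 0)
    (x r : Int) (h : PvReach p x r) : r = x := by
  induction h with
  | root => rfl
  | step y v rr hy hg hv hr ih => exact absurd (hneg y v hy hg) (by omega)

theorem pv_init_reach (n x r : Int)
    (h : PvReach ((PySem.List.pyRange 0 (n+1) 1).map (fun _ => (-1 : Int))) x r) : r = x :=
  pv_reach_id _ (fun y v hy hg => by have := pv_init_get n y v hy hg; omega) x r h

-- non-interference condition between two endpoint values (from Pre_'s Pairwise clause)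
def PvOk (L u v : Int) : Prop := (u = v → 0 ≤ u) ∧ (u ≠ v → ¬ (L ∣ (u - v)))

-- the invariant tying A's parent array to B's label array, relative to the multiset W of
-- endpoint values still to be processed: same length, total reachability on cells, fresh
-- untouched cells for the future negative values, and identical partitions on W
def PvRelW (p comp : List Int) (W : List Int) : Prop :=
  p.length = comp.length ∧
  (∀ x : Int, 0 ≤ x → x < (p.length : Int) → ∃ r, PvReach p x r) ∧
  (∀ v ∈ W, v < 0 →
    (PySem.List.pyGet? p (v + (p.length : Int)) = some (-1) ∧
     (∀ x s, 0 ≤ x → x ≠ v + (p.length : Int) → PvReach p x s → s ≠ v + (p.length : Int)))) ∧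
  (∀ x ∈ W, ∀ y ∈ W, ((∃ r, GReach p x r ∧ GReach p y r) ↔
      PySem.List.pyGetD comp x 0 = PySem.List.pyGetD comp y 0))

-- distinct admissible values address distinct cells
theorem pvOk_cells (L u v : Int) (hL : 0 < L)
    (hu1 : -L ≤ u) (hu2 : u < L) (hv1 : -L ≤ v) (hv2 : v < L)
    (hok : PvOk L u v) (hne : u ≠ v) :
    (if u < 0 then u + L else u) ≠ (if v < 0 then v + L else v) := by
  intro h
  apply hok.2 hne
  split_ifs at h <;> [exact ⟨-1, by omega⟩; exact ⟨-1, by omega⟩; exact ⟨1, by omega⟩;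
    exact ⟨1, by omega⟩]

theorem gReach_fresh_char (p : List Int) (v w r : Int)
    (hg : PySem.List.pyGet? p v = some w) (hw : w < 0) :
    GReach p v r ↔ r = v := by
  constructor
  · intro h
    cases h with
    | root vv hgg hvv => rfl
    | step vv rr hgg hvv hrr => rw [hg] at hgg; cases hgg; omega
  · rintro rfl; exact GReach.root _ w hg hw

-- the B-side comprehension, evaluated at a possibly negative in-range index
theorem pvGetD_map_wrap (comp : List Int) (f : Int → Int) (y : Int)
    (h1 : -(comp.length : Int) ≤ y) (h2 : y < comp.length) :
    PySem.List.pyGetD (comp.map f) y 0 = f (PySem.List.pyGetD comp y 0) := by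
  have key : ∀ z : Int, 0 ≤ z → z < comp.length →
      PySem.List.pyGetD (comp.map f) z 0 = f (PySem.List.pyGetD comp z 0) := by
    intro z hz0 hz1
    rw [PySem.List.pyGetD_of_nonneg _ _ hz0, PySem.List.pyGetD_of_nonneg _ _ hz0]
    have hzlt : z.toNat < comp.length := by omega
    rw [List.getD_eq_getElem?_getD, List.getD_eq_getElem?_getD, List.getElem?_map,
      List.getElem?_eq_getElem hzlt]
    simp
  by_cases hy : 0 ≤ y
  · exact key y hy h2
  · have hmap : (comp.map f).length = comp.length := by simp
    unfold PySem.List.pyGetD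
    rw [pvGet_wrap (comp.map f) y (by rw [hmap]; exact h1) (by omega),
      pvGet_wrap comp y h1 (by omega), hmap]
    have := key (y + comp.length) (by omega) (by omega)
    unfold PySem.List.pyGetD at this
    exact this

-- relabelling cb0 -> ca0 is injective away from ca0
theorem pvRename_iff (ca0 cb0 cx cy : Int) (hx : cx ≠ ca0) (hy : cy ≠ ca0) :
    ((if cx = cb0 then ca0 else cx) = (if cy = cb0 then ca0 else cy)) ↔ cx = cy := by
  split_ifs with h1 h2 h2 <;> constructor <;> intro h <;> omega

theorem pv_stepW (p comp : List Int) (W : List Int) (cnt a b : Int)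
    (hrel : PvRelW p comp (a :: b :: W))
    (hra : -(p.length : Int) ≤ a ∧ a < p.length)
    (hrb : -(p.length : Int) ≤ b ∧ b < p.length)
    (hrW : ∀ w ∈ W, -(p.length : Int) ≤ w ∧ w < p.length)
    (hok_ab : PvOk p.length a b)
    (hok_aW : ∀ w ∈ W, PvOk p.length a w) (hok_bW : ∀ w ∈ W, PvOk p.length b w) :
    PvRelW (pvStepA (p, cnt) (a, b)).1 (pvStepB (comp, cnt) (a, b)).1 W ∧
      (pvStepA (p, cnt) (a, b)).1.length = p.length ∧
      (pvStepA (p, cnt) (a, b)).2 = (pvStepB (comp, cnt) (a, b)).2 := by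
  obtain ⟨hlen, hwf, hfresh, hpair⟩ := hrel
  have hLpos : 0 < (p.length : Int) := by omega
  obtain ⟨k, hk⟩ : ∃ k, p.length = k + 1 := ⟨p.length - 1, by omega⟩
  have hmemA : a ∈ a :: b :: W := by simp
  have hmemB : b ∈ a :: b :: W := by simp
  have hmemW : ∀ w ∈ W, w ∈ a :: b :: W := by intro w hw; simp [hw]
  by_cases hA0 : 0 ≤ a
  · by_cases hB0 : 0 ≤ b
    · -- both endpoints nonnegative: the original union-find versus label-merge argument
      obtain ⟨ra, hra'⟩ := hwf a hA0 hra.2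
      obtain ⟨h1v, h1l, h1E⟩ := ufFind_spec p.length p a ra hA0
        (pvReach_rootI_len p a ra hra')
      obtain ⟨rb, hrb'⟩ := hwf b hB0 hrb.2
      set p1 := (ufFind p.length p a).1 with hp1
      have hrb1 : PvReach p1 b rb := (h1E b rb).mpr hrb'
      obtain ⟨h2v, h2l, h2E⟩ := ufFind_spec p1.length p1 b rb hB0
        (pvReach_rootI_len p1 b rb hrb1)
      set p2 := (ufFind p1.length p1 b).1 with hp2
      have hE12 : ∀ x s, PvReach p2 x s ↔ PvReach p x s :=
        fun x s => (h2E x s).trans (h1E x s)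
      have hlen2 : p2.length = p.length := h2l.trans h1l
      have hkeep12 : ∀ c w0 : Int, 0 ≤ c → PySem.List.pyGet? p c = some w0 → w0 < 0 →
          PySem.List.pyGet? p2 c = some w0 := by
        intro c w0 h0c hg hw0
        rw [hp2]
        refine ufFind_keeps_neg p1.length p1 b hB0 c w0 h0c ?_ hw0
        rw [hp1]
        exact ufFind_keeps_neg p.length p a hA0 c w0 h0c hg hw0
      have hcab : ra = rb ↔ PySem.List.pyGetD comp a 0 = PySem.List.pyGetD comp b 0 := by
        refine Iff.trans ?_ (hpair a hmemA b hmemB)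
        constructor
        · intro h
          exact ⟨ra, (gReach_iff_pvReach p a ra hA0).mpr hra',
            (gReach_iff_pvReach p b ra hB0).mpr (h ▸ hrb')⟩
        · rintro ⟨r, h1, h2⟩
          have e1 := pvReach_det p a ra r hra' ((gReach_iff_pvReach p a r hA0).mp h1)
          have e2 := pvReach_det p b rb r hrb' ((gReach_iff_pvReach p b r hB0).mp h2)
          omega
      -- entry preservation and root characterizations for remaining values
      have hventry2 : ∀ v ∈ W, v < 0 →
          (v + (p.length : Int) ≠ ra ∧ v + (p.length : Int) ≠ rb ∧
            PySem.List.pyGet? p2 (v + (p.length : Int)) = some (-1)) := by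
        intro v hv hvneg
        have hvW := hrW v hv
        have hanev : a ≠ v + (p.length : Int) := by
          intro h
          exact (hok_aW v hv).2 (by omega) ⟨1, by omega⟩
        have hbnev : b ≠ v + (p.length : Int) := by
          intro h
          exact (hok_bW v hv).2 (by omega) ⟨1, by omega⟩
        exact ⟨fun h => ((hfresh v (hmemW v hv) hvneg).2 a ra hA0 hanev hra') h.symm,
          fun h => ((hfresh v (hmemW v hv) hvneg).2 b rb hB0 hbnev hrb') h.symm,
          hkeep12 _ (-1) (by omega) (hfresh v (hmemW v hv) hvneg).1 (by omega)⟩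
      simp only [pvStepA, pvStepB]
      rw [show ((ufFind p.length p a).1) = p1 from rfl, h1v, h2v]
      by_cases hC : ra = rb
      · -- skip: the two finds only compress paths; nothing observable changes
        rw [if_neg (by simpa using hC), if_neg (by simpa using hcab.mp hC)]
        have hGR : ∀ x ∈ W, ∀ r, GReach p2 x r ↔ GReach p x r := by
          intro x hx r
          by_cases hx0 : 0 ≤ x
          · rw [gReach_iff_pvReach _ x r hx0, gReach_iff_pvReach _ x r hx0]
            exact hE12 x r
          · have hgx : PySem.List.pyGet? p x = some (-1) := by
              rw [pvGet_wrap p x (hrW x hx).1 (by omega)]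
              exact (hfresh x (hmemW x hx) (by omega)).1
            have hgx2 : PySem.List.pyGet? p2 x = some (-1) := by
              rw [pvGet_wrap _ x (by rw [hlen2]; exact (hrW x hx).1) (by omega), hlen2]
              exact (hventry2 x hx (by omega)).2.2
            rw [gReach_fresh_char _ x (-1) r hgx2 (by omega),
              gReach_fresh_char _ x (-1) r hgx (by omega)]
        refine ⟨⟨hlen2.trans hlen, ?_, ?_, ?_⟩, hlen2, rfl⟩
        · intro x hx0 hx1
          rw [hlen2] at hx1
          obtain ⟨r, hr⟩ := hwf x hx0 hx1
          exact ⟨r, (hE12 x r).mpr hr⟩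
        · intro v hv hvneg
          rw [hlen2]
          refine ⟨(hventry2 v hv hvneg).2.2, ?_⟩
          intro x s hx0 hxne hr
          exact (hfresh v (hmemW v hv) hvneg).2 x s hx0 hxne ((hE12 x s).mp hr)
        · intro x hx y hy
          refine Iff.trans ?_ (hpair x (hmemW x hx) y (hmemW y hy))
          constructor
          · rintro ⟨r, h1, h2⟩
            exact ⟨r, (hGR x hx r).mp h1, (hGR y hy r).mp h2⟩
          · rintro ⟨r, h1, h2⟩
            exact ⟨r, (hGR x hx r).mpr h1, (hGR y hy r).mpr h2⟩
      · -- genuine union of two distinct classes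
        have hCc : PySem.List.pyGetD comp a 0 ≠ PySem.List.pyGetD comp b 0 :=
          fun h => hC (hcab.mpr h)
        rw [if_pos (by simpa using hC), if_pos (by simpa using hCc)]
        have hra2 : PvReach p2 a ra := (hE12 a ra).mpr hra'
        obtain ⟨h3v, h3l, h3E⟩ := ufFind_spec p2.length p2 a ra hA0
          (pvReach_rootI_len p2 a ra hra2)
        have hrb3 : PvReach (ufFind p2.length p2 a).1 b rb :=
          (h3E b rb).mpr ((hE12 b rb).mpr hrb')
        obtain ⟨h4v, h4l, h4E⟩ := ufFind_spec (ufFind p2.length p2 a).1.length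
          (ufFind p2.length p2 a).1 b rb hB0 (pvReach_rootI_len _ b rb hrb3)
        set q := (ufFind (ufFind p2.length p2 a).1.length (ufFind p2.length p2 a).1 b).1
          with hq
        have hqE : ∀ x s, PvReach q x s ↔ PvReach p x s :=
          fun x s => ((h4E x s).trans (h3E x s)).trans (hE12 x s)
        have hqlen : q.length = p.length := (h4l.trans h3l).trans hlen2
        have hqkeep : ∀ c w0 : Int, 0 ≤ c → PySem.List.pyGet? p c = some w0 → w0 < 0 →
            PySem.List.pyGet? q c = some w0 := by
          intro c w0 h0c hg hw0
          rw [hq]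
          refine ufFind_keeps_neg _ _ b hB0 c w0 h0c ?_ hw0
          exact ufFind_keeps_neg _ _ a hA0 c w0 h0c (hkeep12 c w0 h0c hg hw0) hw0
        obtain ⟨su, h0ra, hgra, hsu⟩ := pvReach_root_spec q a ra ((hqE a ra).mpr hra')
        obtain ⟨sw, h0rb, hgrb, hsw⟩ := pvReach_root_spec q b rb ((hqE b rb).mpr hrb')
        have hUnion : ∃ U V : Int, ((U = ra ∧ V = rb) ∨ (U = rb ∧ V = ra)) ∧
            ufUnion p2 a b = PySem.List.pySetD (PySem.List.pySetD q U
              (PySem.List.pyGetD q U 0 + PySem.List.pyGetD q V 0)) V U := by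
          by_cases hcmp : PySem.List.pyGetD q ra 0 < PySem.List.pyGetD q rb 0
          · refine ⟨ra, rb, Or.inl ⟨rfl, rfl⟩, ?_⟩
            simp only [ufUnion, h3v, h4v, ← hq, if_neg hC, if_pos hcmp]
          · refine ⟨rb, ra, Or.inr ⟨rfl, rfl⟩, ?_⟩
            simp only [ufUnion, h3v, h4v, ← hq, if_neg hC, if_neg hcmp]
        obtain ⟨U, V, hUV, hUeq⟩ := hUnion
        have hgU : ∃ sU, 0 ≤ U ∧ PySem.List.pyGet? q U = some sU ∧ sU < 0 := by
          rcases hUV with ⟨rfl, _⟩ | ⟨rfl, _⟩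
          · exact ⟨su, h0ra, hgra, hsu⟩
          · exact ⟨sw, h0rb, hgrb, hsw⟩
        have hgV : ∃ sV, 0 ≤ V ∧ PySem.List.pyGet? q V = some sV ∧ sV < 0 := by
          rcases hUV with ⟨_, rfl⟩ | ⟨_, rfl⟩
          · exact ⟨sw, h0rb, hgrb, hsw⟩
          · exact ⟨su, h0ra, hgra, hsu⟩
        obtain ⟨sU, h0U, hgetU, hsU⟩ := hgU
        obtain ⟨sV, h0V, hgetV, hsV⟩ := hgV
        have hUVne : U ≠ V := by
          rcases hUV with ⟨rfl, rfl⟩ | ⟨rfl, rfl⟩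
          · exact hC
          · exact fun h => hC h.symm
        have hval : PySem.List.pyGetD q U 0 + PySem.List.pyGetD q V 0 < 0 := by
          simp [PySem.List.pyGetD, hgetU, hgetV]; omega
        have hlink := pv_link q U V sU sV _ h0U h0V hUVne hgetU hsU hgetV hsV hval
        rw [hUeq]
        have hlenA : (PySem.List.pySetD (PySem.List.pySetD q U
            (PySem.List.pyGetD q U 0 + PySem.List.pyGetD q V 0)) V U).length
            = p.length := by
          rw [PySem.List.length_pySetD, PySem.List.length_pySetD, hqlen]
        have hUlt : U.toNat < q.length := by
          have := pvIdx_lt q U sU h0U hgetU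
          omega
        have hVlt : V.toNat < (PySem.List.pySetD q U
            (PySem.List.pyGetD q U 0 + PySem.List.pyGetD q V 0)).length := by
          rw [PySem.List.length_pySetD]
          have := pvIdx_lt q V sV h0V hgetV
          omega
        have hentry : ∀ v ∈ W, v < 0 →
            PySem.List.pyGet? (PySem.List.pySetD (PySem.List.pySetD q U
              (PySem.List.pyGetD q U 0 + PySem.List.pyGetD q V 0)) V U)
              (v + (p.length : Int)) = some (-1) := by
          intro v hv hvneg
          obtain ⟨hv1, hv2, _⟩ := hventry2 v hv hvneg
          have hvW := hrW v hv
          have hvU : v + (p.length : Int) ≠ U := by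
            rcases hUV with ⟨rfl, _⟩ | ⟨rfl, _⟩ <;> [exact hv1; exact hv2]
          have hvV : v + (p.length : Int) ≠ V := by
            rcases hUV with ⟨_, rfl⟩ | ⟨_, rfl⟩ <;> [exact hv2; exact hv1]
          rw [pvGet_set _ V U (v + (p.length : Int)) h0V hVlt (by omega), if_neg hvV,
            pvGet_set q U _ (v + (p.length : Int)) h0U hUlt (by omega), if_neg hvU]
          exact hqkeep _ (-1) (by omega) (hfresh v (hmemW v hv) hvneg).1 (by omega)
        -- find's value from a remaining index, after the link
        have hGq : ∀ x ∈ W, ∀ r, GReach q x r ↔ GReach p x r := by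
          intro x hx r
          by_cases hx0 : 0 ≤ x
          · rw [gReach_iff_pvReach _ x r hx0, gReach_iff_pvReach _ x r hx0]
            exact hqE x r
          · have hxW := hrW x hx
            have hgx : PySem.List.pyGet? p x = some (-1) := by
              rw [pvGet_wrap p x (hrW x hx).1 (by omega)]
              exact (hfresh x (hmemW x hx) (by omega)).1
            have hgx2 : PySem.List.pyGet? q x = some (-1) := by
              rw [pvGet_wrap _ x (by rw [hqlen]; exact (hrW x hx).1) (by omega), hqlen]
              exact hqkeep _ (-1) (by omega) (hfresh x (hmemW x hx) (by omega)).1 (by omega)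
            rw [gReach_fresh_char _ x (-1) r hgx2 (by omega),
              gReach_fresh_char _ x (-1) r hgx (by omega)]
        have hGlink : ∀ x ∈ W, ∀ s,
            GReach (PySem.List.pySetD (PySem.List.pySetD q U
              (PySem.List.pyGetD q U 0 + PySem.List.pyGetD q V 0)) V U) x s ↔
            ∃ s', GReach p x s' ∧ s = (if s' = V then U else s') := by
          intro x hx s
          by_cases hx0 : 0 ≤ x
          · rw [gReach_iff_pvReach _ x s hx0]
            refine (hlink x s).trans ?_
            constructor
            · rintro ⟨s', h1, h2⟩
              exact ⟨s', (gReach_iff_pvReach p x s' hx0).mpr ((hqE x s').mp h1), h2⟩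
            · rintro ⟨s', h1, h2⟩
              exact ⟨s', (hqE x s').mpr ((gReach_iff_pvReach p x s' hx0).mp h1), h2⟩
          · have hgx : PySem.List.pyGet? p x = some (-1) := by
              rw [pvGet_wrap p x (hrW x hx).1 (by omega)]
              exact (hfresh x (hmemW x hx) (by omega)).1
            have hgx2 : PySem.List.pyGet? (PySem.List.pySetD (PySem.List.pySetD q U
                (PySem.List.pyGetD q U 0 + PySem.List.pyGetD q V 0)) V U) x
                = some (-1) := by
              rw [pvGet_wrap _ x (by rw [hlenA]; exact (hrW x hx).1) (by omega), hlenA]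
              exact hentry x hx (by omega)
            rw [gReach_fresh_char _ x (-1) s hgx2 (by omega)]
            constructor
            · intro hsx
              refine ⟨x, (gReach_fresh_char p x (-1) x hgx (by omega)).mpr rfl, ?_⟩
              rw [if_neg (by omega)]
              exact hsx
            · rintro ⟨s', h1, h2⟩
              have := (gReach_fresh_char p x (-1) s' hgx (by omega)).mp h1
              subst this
              rw [if_neg (by omega)] at h2
              omega
        refine ⟨⟨by rw [hlenA, hlen]; simp, ?_, ?_, ?_⟩, hlenA, rfl⟩
        · intro x hx0 hx1
          rw [hlenA] at hx1
          obtain ⟨r, hr⟩ := hwf x hx0 hx1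
          exact ⟨if r = V then U else r,
            (hlink x _).mpr ⟨r, (hqE x r).mpr hr, rfl⟩⟩
        · intro v hv hvneg
          rw [hlenA]
          obtain ⟨hv1, hv2, _⟩ := hventry2 v hv hvneg
          have hvU : U ≠ v + (p.length : Int) := by
            rcases hUV with ⟨rfl, _⟩ | ⟨rfl, _⟩ <;> [exact fun h => hv1 h.symm;
              exact fun h => hv2 h.symm]
          refine ⟨hentry v hv hvneg, ?_⟩
          intro x s hx0 hxne hr
          obtain ⟨s', hs', rfl⟩ := (hlink x s).mp hr
          have hs'ne : s' ≠ v + (p.length : Int) :=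
            (hfresh v (hmemW v hv) hvneg).2 x s' hx0 hxne ((hqE x s').mp hs')
          by_cases hsv : s' = V
          · rw [if_pos hsv]
            exact hvU
          · rw [if_neg hsv]
            exact hs'ne
        · intro x hx y hy
          obtain ⟨rx, hrx⟩ : ∃ r, GReach p x r := by
            by_cases hx0 : 0 ≤ x
            · obtain ⟨r, hr⟩ := hwf x hx0 (hrW x hx).2
              exact ⟨r, (gReach_iff_pvReach p x r hx0).mpr hr⟩
            · refine ⟨x, (gReach_fresh_char p x (-1) x ?_ (by omega)).mpr rfl⟩
              rw [pvGet_wrap p x (hrW x hx).1 (by omega)]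
              exact (hfresh x (hmemW x hx) (by omega)).1
          obtain ⟨ry, hry⟩ : ∃ r, GReach p y r := by
            by_cases hy0 : 0 ≤ y
            · obtain ⟨r, hr⟩ := hwf y hy0 (hrW y hy).2
              exact ⟨r, (gReach_iff_pvReach p y r hy0).mpr hr⟩
            · refine ⟨y, (gReach_fresh_char p y (-1) y ?_ (by omega)).mpr rfl⟩
              rw [pvGet_wrap p y (hrW y hy).1 (by omega)]
              exact (hfresh y (hmemW y hy) (by omega)).1
          have hcompx : ∀ z ∈ (a :: b :: W), PySem.List.pyGetD (comp.map (fun c =>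
              if c = PySem.List.pyGetD comp b 0 then PySem.List.pyGetD comp a 0 else c))
              z 0 = (fun c => if c = PySem.List.pyGetD comp b 0
                then PySem.List.pyGetD comp a 0 else c) (PySem.List.pyGetD comp z 0) := by
            intro z hz
            have hzb : -(p.length : Int) ≤ z ∧ z < p.length := by
              simp only [List.mem_cons] at hz
              rcases hz with rfl | rfl | hz
              · exact hra
              · exact hrb
              · exact hrW z hz
            exact pvGetD_map_wrap comp _ z (by rw [← hlen]; exact hzb.1)
              (by rw [← hlen]; exact hzb.2)
          rw [hcompx x (hmemW x hx), hcompx y (hmemW y hy)]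
          have hLHS : (∃ r, GReach (PySem.List.pySetD (PySem.List.pySetD q U
              (PySem.List.pyGetD q U 0 + PySem.List.pyGetD q V 0)) V U) x r ∧
              GReach (PySem.List.pySetD (PySem.List.pySetD q U
              (PySem.List.pyGetD q U 0 + PySem.List.pyGetD q V 0)) V U) y r) ↔
              ((if rx = V then U else rx) = (if ry = V then U else ry)) := by
            constructor
            · rintro ⟨r, h1, h2⟩
              obtain ⟨s1, hs1, he1⟩ := (hGlink x hx r).mp h1
              obtain ⟨s2, hs2, he2⟩ := (hGlink y hy r).mp h2
              rw [gReach_det p x s1 rx hs1 hrx] at he1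
              rw [gReach_det p y s2 ry hs2 hry] at he2
              rw [← he1, ← he2]
            · intro h
              exact ⟨if rx = V then U else rx, (hGlink x hx _).mpr ⟨rx, hrx, rfl⟩,
                (hGlink y hy _).mpr ⟨ry, hry, h ▸ rfl⟩⟩
          rw [hLHS]
          have hiff : ∀ z ∈ (a :: b :: W), ∀ rz, GReach p z rz →
              ∀ u ∈ (a :: b :: W), ∀ ru, GReach p u ru →
              (rz = ru ↔ PySem.List.pyGetD comp z 0 = PySem.List.pyGetD comp u 0) := by
            intro z hz rz hrz u hu ru hru
            refine Iff.trans ?_ (hpair z hz u hu)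
            constructor
            · intro h; exact ⟨rz, hrz, h ▸ hru⟩
            · rintro ⟨r, hr1, hr2⟩
              rw [gReach_det p z rz r hrz hr1, gReach_det p u ru r hru hr2]
          have hga : GReach p a ra := (gReach_iff_pvReach p a ra hA0).mpr hra'
          have hgb : GReach p b rb := (gReach_iff_pvReach p b rb hB0).mpr hrb'
          exact pv_part_iff ra rb (PySem.List.pyGetD comp a 0) (PySem.List.pyGetD comp b 0)
            rx ry (PySem.List.pyGetD comp x 0) (PySem.List.pyGetD comp y 0) U V hC hCc
            (hiff x (hmemW x hx) rx hrx y (hmemW y hy) ry hry)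
            (hiff x (hmemW x hx) rx hrx a hmemA ra hga)
            (hiff x (hmemW x hx) rx hrx b hmemB rb hgb)
            (hiff y (hmemW y hy) ry hry a hmemA ra hga)
            (hiff y (hmemW y hy) ry hry b hmemB rb hgb) hUV
    · -- a nonnegative, b negative (fresh): the edge always unites; whether b's fresh cell
      -- is attached under a's root or a's root becomes a phantom depends on a's class size,
      -- but no reachability fact of a remaining value changes either way
      obtain ⟨hfb_entry, hfb_avoid⟩ := hfresh b hmemB (by omega)
      have hgb : PySem.List.pyGet? p b = some (-1) := by
        rw [pvGet_wrap p b hrb.1 (by omega)]; exact hfb_entry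
      obtain ⟨ra, hra'⟩ := hwf a hA0 hra.2
      obtain ⟨h1v, h1l, h1E⟩ := ufFind_spec p.length p a ra hA0
        (pvReach_rootI_len p a ra hra')
      have hanebc : a ≠ b + (p.length : Int) := by
        intro h
        exact hok_ab.2 (by omega) ⟨1, by omega⟩
      have hranebc : ra ≠ b + (p.length : Int) := hfb_avoid a ra hA0 hanebc hra'
      obtain ⟨sra0, h0ra, hgra0, hsra0⟩ := pvReach_root_spec p a ra hra'
      have hraneb : ra ≠ b := by omega
      set p1 := (ufFind p.length p a).1 with hp1
      have hgb1 : PySem.List.pyGet? p1 (b + (p.length : Int)) = some (-1) := by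
        rw [hp1]
        exact ufFind_keeps_neg p.length p a hA0 (b + (p.length : Int)) (-1) (by omega)
          hfb_entry (by omega)
      have hgb1' : PySem.List.pyGet? p1 b = some (-1) := by
        rw [pvGet_wrap _ b (by rw [h1l]; exact hrb.1) (by omega), h1l]
        exact hgb1
      have hfind_b1 : ufFind p1.length p1 b = (p1, b) := by
        rw [h1l, hk]
        exact ufFind_root_eval k p1 b (-1) hgb1' (by omega)
      -- inside the union: find a again on p1, then find b (identity)
      have hra1 : PvReach p1 a ra := (h1E a ra).mpr hra'
      obtain ⟨h2v, h2l, h2E⟩ := ufFind_spec p1.length p1 a ra hA0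
        (pvReach_rootI_len p1 a ra hra1)
      set p2 := (ufFind p1.length p1 a).1 with hp2
      have hE12 : ∀ x s, PvReach p2 x s ↔ PvReach p x s :=
        fun x s => (h2E x s).trans (h1E x s)
      have hlen2 : p2.length = p.length := h2l.trans h1l
      have hgb2 : PySem.List.pyGet? p2 (b + (p.length : Int)) = some (-1) := by
        rw [hp2]
        exact ufFind_keeps_neg p1.length p1 a hA0 (b + (p.length : Int)) (-1) (by omega)
          hgb1 (by omega)
      have hgb2' : PySem.List.pyGet? p2 b = some (-1) := by
        rw [pvGet_wrap _ b (by rw [hlen2]; exact hrb.1) (by omega), hlen2]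
        exact hgb2
      have hfind_b2 : ufFind p2.length p2 b = (p2, b) := by
        rw [hlen2, hk]
        exact ufFind_root_eval k p2 b (-1) hgb2' (by omega)
      have hra2 : PvReach p2 a ra := (h2E a ra).mpr hra1
      obtain ⟨sra, h0ra2, hgra2, hsra2⟩ := pvReach_root_spec p2 a ra hra2
      have hgd_b : PySem.List.pyGetD p2 b 0 = -1 := by simp [PySem.List.pyGetD, hgb2']
      have hgd_ra : PySem.List.pyGetD p2 ra 0 = sra := by simp [PySem.List.pyGetD, hgra2]
      have hralt : ra.toNat < p2.length := by
        have := pvIdx_lt p2 ra sra h0ra2 hgra2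
        omega
      have hunion : ufUnion p1 a b =
          (if sra < -1 then
            PySem.List.pySetD (PySem.List.pySetD p2 ra (sra + -1)) b ra
          else
            PySem.List.pySetD (PySem.List.pySetD p2 b (-1 + sra)) ra b) := by
        simp only [ufUnion]
        rw [show ((ufFind p1.length p1 a).1) = p2 from rfl, h2v, hfind_b2]
        rw [if_neg (by simpa using hraneb)]
        simp only [hgd_b, hgd_ra]
      have hstepA : pvStepA (p, cnt) (a, b) =
          ((if sra < -1 then
            PySem.List.pySetD (PySem.List.pySetD p2 ra (sra + -1)) b ra
          else
            PySem.List.pySetD (PySem.List.pySetD p2 b (-1 + sra)) ra b), cnt + 1) := by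
        simp only [pvStepA]
        rw [show ((ufFind p.length p a).1) = p1 from rfl, h1v, hfind_b1]
        rw [if_pos (by simpa using hraneb), hunion]
      have hchB : ∀ r, GReach p b r ↔ r = b :=
        fun r => gReach_fresh_char p b (-1) r hgb (by omega)
      have hcab : PySem.List.pyGetD comp a 0 ≠ PySem.List.pyGetD comp b 0 := by
        intro h
        obtain ⟨r, h1, h2⟩ := (hpair a hmemA b hmemB).mpr h
        have e1 := pvReach_det p a ra r hra' ((gReach_iff_pvReach p a r hA0).mp h1)
        have e2 := (hchB r).mp h2
        omega
      have hstepB : pvStepB (comp, cnt) (a, b) =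
          (comp.map (fun c => if c = PySem.List.pyGetD comp b 0
            then PySem.List.pyGetD comp a 0 else c), cnt + 1) := by
        simp only [pvStepB]
        rw [if_pos (by simpa using hcab)]
      rw [hstepA, hstepB]
      have hnocb : ∀ y ∈ W, PySem.List.pyGetD comp y 0 ≠ PySem.List.pyGetD comp b 0 := by
        intro y hy h
        obtain ⟨r, h1, h2⟩ := (hpair y (hmemW y hy) b hmemB).mpr h
        have e2 := (hchB r).mp h2
        by_cases hy0 : 0 ≤ y
        · have := pvReach_root_spec p y r ((gReach_iff_pvReach p y r hy0).mp h1)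
          omega
        · have hgy : PySem.List.pyGet? p y = some (-1) := by
            rw [pvGet_wrap p y (hrW y hy).1 (by omega)]
            exact (hfresh y (hmemW y hy) (by omega)).1
          have hyb : y ≠ b := fun hh => absurd ((hok_bW y hy).1 hh.symm) (by omega)
          have e1 := (gReach_fresh_char p y (-1) r hgy (by omega)).mp h1
          omega
      have hcomp' : ∀ y ∈ W, PySem.List.pyGetD (comp.map (fun c =>
          if c = PySem.List.pyGetD comp b 0 then PySem.List.pyGetD comp a 0 else c)) y 0
          = PySem.List.pyGetD comp y 0 := by
        intro y hy
        rw [pvGetD_map_wrap comp _ y (by rw [← hlen]; exact (hrW y hy).1)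
          (by rw [← hlen]; exact (hrW y hy).2), if_neg (hnocb y hy)]
      have hventry : ∀ v ∈ W, v < 0 →
          (v + (p.length : Int) ≠ ra ∧ v + (p.length : Int) ≠ b + (p.length : Int) ∧
            PySem.List.pyGet? p2 (v + (p.length : Int)) = some (-1)) := by
        intro v hv hvneg
        have hvW := hrW v hv
        have hanev : a ≠ v + (p.length : Int) := by
          intro h
          exact (hok_aW v hv).2 (by omega) ⟨1, by omega⟩
        have hranev : ra ≠ v + (p.length : Int) :=
          (hfresh v (hmemW v hv) hvneg).2 a ra hA0 hanev hra'
        have hvb : v ≠ b := fun h => absurd ((hok_bW v hv).1 h.symm) (by omega)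
        refine ⟨fun h => hranev h.symm, by omega, ?_⟩
        rw [hp2]
        refine ufFind_keeps_neg p1.length p1 a hA0 _ (-1) (by omega) ?_ (by omega)
        rw [hp1]
        exact ufFind_keeps_neg p.length p a hA0 _ (-1) (by omega)
          (hfresh v (hmemW v hv) hvneg).1 (by omega)
      by_cases hcmp : sra < -1
      · -- a's class is larger: b's fresh cell is attached under ra
        rw [if_pos hcmp]
        have hlenw1 : (PySem.List.pySetD p2 ra (sra + -1)).length = p.length := by
          rw [PySem.List.length_pySetD, hlen2]
        have hpres1 := pv_set_neg p2 ra (sra + -1) sra h0ra2 hralt hgra2 hsra2 (by omega)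
        have hgb_w1 : PySem.List.pyGet? (PySem.List.pySetD p2 ra (sra + -1))
            (b + (p.length : Int)) = some (-1) := by
          rw [pvGet_set p2 ra (sra + -1) (b + (p.length : Int)) h0ra2 hralt (by omega),
            if_neg (fun h => hranebc h.symm)]
          exact hgb2
        have hw2 : PySem.List.pySetD (PySem.List.pySetD p2 ra (sra + -1)) b ra =
            PySem.List.pySetD (PySem.List.pySetD p2 ra (sra + -1))
              (b + (p.length : Int)) ra := by
          have h := pvSetD_wrap (PySem.List.pySetD p2 ra (sra + -1)) b ra
            (by rw [hlenw1]; exact hrb.1) (by omega)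
          rw [hlenw1] at h
          exact h
        have havoid_w1 : ∀ x s, 0 ≤ x → x ≠ b + (p.length : Int) →
            PvReach (PySem.List.pySetD p2 ra (sra + -1)) x s →
            s ≠ b + (p.length : Int) := by
          intro x s hx0 hxne hr
          exact hfb_avoid x s hx0 hxne ((hE12 x s).mp ((hpres1 x s).mp hr))
        have hpresOff : ∀ x s, x ≠ b + (p.length : Int) →
            (PvReach (PySem.List.pySetD (PySem.List.pySetD p2 ra (sra + -1)) b ra) x s ↔
              PvReach p x s) := by
          intro x s hxne
          rw [hw2]
          refine (pv_set_avoid (PySem.List.pySetD p2 ra (sra + -1)) (b + (p.length : Int))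
            ra (-1) (by omega) (by rw [hlenw1]; omega) hgb_w1 (by omega) havoid_w1 x s
            hxne).trans ?_
          exact (hpres1 x s).trans (hE12 x s)
        have hlenA : (PySem.List.pySetD (PySem.List.pySetD p2 ra (sra + -1)) b ra).length
            = p.length := by
          rw [PySem.List.length_pySetD, hlenw1]
        have hgra_A : PySem.List.pyGet?
            (PySem.List.pySetD (PySem.List.pySetD p2 ra (sra + -1)) b ra) ra
            = some (sra + -1) := by
          rw [hw2, pvGet_set _ (b + (p.length : Int)) ra ra (by omega)
            (by rw [hlenw1]; omega) h0ra2, if_neg hranebc,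
            pvGet_set p2 ra (sra + -1) ra h0ra2 hralt h0ra2, if_pos rfl]
        have hreach_cell : PvReach
            (PySem.List.pySetD (PySem.List.pySetD p2 ra (sra + -1)) b ra)
            (b + (p.length : Int)) ra := by
          refine PvReach.step _ ra ra (by omega) ?_ h0ra2
            (PvReach.root ra (sra + -1) h0ra2 hgra_A (by omega))
          rw [hw2, pvGet_set _ (b + (p.length : Int)) ra (b + (p.length : Int)) (by omega)
            (by rw [hlenw1]; omega) (by omega), if_pos rfl]
        have hentry : ∀ v ∈ W, v < 0 →
            PySem.List.pyGet? (PySem.List.pySetD (PySem.List.pySetD p2 ra (sra + -1)) b ra)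
              (v + (p.length : Int)) = some (-1) := by
          intro v hv hvneg
          obtain ⟨hv1, hv2, hv3⟩ := hventry v hv hvneg
          have hvW := hrW v hv
          rw [hw2, pvGet_set _ (b + (p.length : Int)) ra (v + (p.length : Int)) (by omega)
            (by rw [hlenw1]; omega) (by omega), if_neg hv2,
            pvGet_set p2 ra (sra + -1) (v + (p.length : Int)) h0ra2 hralt (by omega),
            if_neg hv1]
          exact hv3
        have hGR : ∀ x ∈ W, ∀ r,
            GReach (PySem.List.pySetD (PySem.List.pySetD p2 ra (sra + -1)) b ra) x r ↔
              GReach p x r := by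
          intro x hx r
          by_cases hx0 : 0 ≤ x
          · have hxne : x ≠ b + (p.length : Int) := by
              intro h
              have hxb : b ≠ x := by omega
              exact (hok_bW x hx).2 hxb ⟨-1, by omega⟩
            rw [gReach_iff_pvReach _ x r hx0, gReach_iff_pvReach _ x r hx0]
            exact hpresOff x r hxne
          · have hgx : PySem.List.pyGet? p x = some (-1) := by
              rw [pvGet_wrap p x (hrW x hx).1 (by omega)]
              exact (hfresh x (hmemW x hx) (by omega)).1
            have hgx2 : PySem.List.pyGet?
                (PySem.List.pySetD (PySem.List.pySetD p2 ra (sra + -1)) b ra) x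
                = some (-1) := by
              rw [pvGet_wrap _ x (by rw [hlenA]; exact (hrW x hx).1) (by omega), hlenA]
              exact hentry x hx (by omega)
            rw [gReach_fresh_char _ x (-1) r hgx2 (by omega),
              gReach_fresh_char _ x (-1) r hgx (by omega)]
        refine ⟨⟨by rw [hlenA, hlen]; simp, ?_, ?_, ?_⟩, hlenA, rfl⟩
        · intro x hx0 hx1
          rw [hlenA] at hx1
          by_cases hxc : x = b + (p.length : Int)
          · exact ⟨ra, hxc ▸ hreach_cell⟩
          · obtain ⟨r, hr⟩ := hwf x hx0 hx1
            exact ⟨r, (hpresOff x r hxc).mpr hr⟩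
        · intro v hv hvneg
          rw [hlenA]
          obtain ⟨hv1, hv2, hv3⟩ := hventry v hv hvneg
          refine ⟨hentry v hv hvneg, ?_⟩
          intro x s hx0 hxne hr
          by_cases hxc : x = b + (p.length : Int)
          · rw [pvReach_det _ x s ra hr (hxc ▸ hreach_cell)]
            exact fun h => hv1 h.symm
          · exact (hfresh v (hmemW v hv) hvneg).2 x s hx0 hxne ((hpresOff x s hxc).mp hr)
        · intro x hx y hy
          rw [hcomp' x hx, hcomp' y hy]
          refine Iff.trans ?_ (hpair x (hmemW x hx) y (hmemW y hy))
          constructor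
          · rintro ⟨r, h1, h2⟩
            exact ⟨r, (hGR x hx r).mp h1, (hGR y hy r).mp h2⟩
          · rintro ⟨r, h1, h2⟩
            exact ⟨r, (hGR x hx r).mpr h1, (hGR y hy r).mpr h2⟩
      · -- class sizes tie: a's root cell becomes a phantom root; no reachability fact
        -- of a remaining value changes at all
        rw [if_neg hcmp]
        have hw1 : PySem.List.pySetD p2 b (-1 + sra) =
            PySem.List.pySetD p2 (b + (p.length : Int)) (-1 + sra) := by
          have h := pvSetD_wrap p2 b (-1 + sra) (by rw [hlen2]; exact hrb.1) (by omega)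
          rw [hlen2] at h
          exact h
        have hlenw1 : (PySem.List.pySetD p2 b (-1 + sra)).length = p.length := by
          rw [PySem.List.length_pySetD, hlen2]
        have hpres1 := pv_set_neg p2 (b + (p.length : Int)) (-1 + sra) (-1) (by omega)
          (by omega) hgb2 (by omega) (by omega)
        have hgra_w1 : PySem.List.pyGet? (PySem.List.pySetD p2 b (-1 + sra)) ra
            = some sra := by
          rw [hw1, pvGet_set p2 (b + (p.length : Int)) _ ra (by omega) (by omega) h0ra2,
            if_neg hranebc]
          exact hgra2
        have hpres2 := pv_set_neg (PySem.List.pySetD p2 b (-1 + sra)) ra b sra h0ra2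
          (by rw [hlenw1]; omega) hgra_w1 hsra2 (by omega)
        have hpres : ∀ x s, PvReach (PySem.List.pySetD
            (PySem.List.pySetD p2 b (-1 + sra)) ra b) x s ↔ PvReach p x s := by
          intro x s
          refine (hpres2 x s).trans ?_
          rw [hw1]
          exact (hpres1 x s).trans (hE12 x s)
        have hlenA : (PySem.List.pySetD (PySem.List.pySetD p2 b (-1 + sra)) ra b).length
            = p.length := by
          rw [PySem.List.length_pySetD, hlenw1]
        have hentry : ∀ v ∈ W, v < 0 →
            PySem.List.pyGet? (PySem.List.pySetD (PySem.List.pySetD p2 b (-1 + sra)) ra b)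
              (v + (p.length : Int)) = some (-1) := by
          intro v hv hvneg
          obtain ⟨hv1, hv2, hv3⟩ := hventry v hv hvneg
          have hvW := hrW v hv
          rw [pvGet_set (PySem.List.pySetD p2 b (-1 + sra)) ra b (v + (p.length : Int))
            h0ra2 (by rw [hlenw1]; omega) (by omega), if_neg hv1, hw1,
            pvGet_set p2 (b + (p.length : Int)) _ (v + (p.length : Int)) (by omega)
            (by omega) (by omega), if_neg hv2]
          exact hv3
        have hGR : ∀ x ∈ W, ∀ r,
            GReach (PySem.List.pySetD (PySem.List.pySetD p2 b (-1 + sra)) ra b) x r ↔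
              GReach p x r := by
          intro x hx r
          by_cases hx0 : 0 ≤ x
          · rw [gReach_iff_pvReach _ x r hx0, gReach_iff_pvReach _ x r hx0]
            exact hpres x r
          · have hgx : PySem.List.pyGet? p x = some (-1) := by
              rw [pvGet_wrap p x (hrW x hx).1 (by omega)]
              exact (hfresh x (hmemW x hx) (by omega)).1
            have hgx2 : PySem.List.pyGet?
                (PySem.List.pySetD (PySem.List.pySetD p2 b (-1 + sra)) ra b) x
                = some (-1) := by
              rw [pvGet_wrap _ x (by rw [hlenA]; exact (hrW x hx).1) (by omega), hlenA]
              exact hentry x hx (by omega)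
            rw [gReach_fresh_char _ x (-1) r hgx2 (by omega),
              gReach_fresh_char _ x (-1) r hgx (by omega)]
        refine ⟨⟨by rw [hlenA, hlen]; simp, ?_, ?_, ?_⟩, hlenA, rfl⟩
        · intro x hx0 hx1
          rw [hlenA] at hx1
          obtain ⟨r, hr⟩ := hwf x hx0 hx1
          exact ⟨r, (hpres x r).mpr hr⟩
        · intro v hv hvneg
          rw [hlenA]
          refine ⟨hentry v hv hvneg, ?_⟩
          intro x s hx0 hxne hr
          exact (hfresh v (hmemW v hv) hvneg).2 x s hx0 hxne ((hpres x s).mp hr)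
        · intro x hx y hy
          rw [hcomp' x hx, hcomp' y hy]
          refine Iff.trans ?_ (hpair x (hmemW x hx) y (hmemW y hy))
          constructor
          · rintro ⟨r, h1, h2⟩
            exact ⟨r, (hGR x hx r).mp h1, (hGR y hy r).mp h2⟩
          · rintro ⟨r, h1, h2⟩
            exact ⟨r, (hGR x hx r).mpr h1, (hGR y hy r).mpr h2⟩

  · by_cases hB0 : 0 ≤ b
    · -- a negative (fresh), b nonnegative: the edge always unites a's fresh cell under b's root
      obtain ⟨hfa_entry, hfa_avoid⟩ := hfresh a hmemA (by omega)
      have hga : PySem.List.pyGet? p a = some (-1) := by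
        rw [pvGet_wrap p a hra.1 (by omega)]; exact hfa_entry
      have hfind_a : ufFind p.length p a = (p, a) := by
        rw [hk]; exact ufFind_root_eval k p a (-1) hga (by omega)
      obtain ⟨rb, hrb⟩ := hwf b hB0 hrb.2
      obtain ⟨h1v, h1l, h1E⟩ := ufFind_spec p.length p b rb hB0 (pvReach_rootI_len p b rb hrb)
      obtain ⟨srb0, h0rb, hgrb0, hsrb0⟩ := pvReach_root_spec p b rb hrb
      have hbnea : b ≠ a + (p.length : Int) := by
        intro h
        exact hok_ab.2 (by omega) ⟨-1, by omega⟩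
      have hrbnea : rb ≠ a + (p.length : Int) := hfa_avoid b rb hB0 hbnea hrb
      have hanerb : a ≠ rb := by omega
      set p1 := (ufFind p.length p b).1 with hp1
      have hga1 : PySem.List.pyGet? p1 (a + (p.length : Int)) = some (-1) := by
        rw [hp1]
        exact ufFind_keeps_neg p.length p b hB0 (a + (p.length : Int)) (-1) (by omega)
          hfa_entry (by omega)
      have hga1' : PySem.List.pyGet? p1 a = some (-1) := by
        rw [pvGet_wrap _ a (by rw [h1l]; exact hra.1) (by omega), h1l]
        exact hga1
      have hfind_a1 : ufFind p1.length p1 a = (p1, a) := by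
        rw [h1l, hk]
        exact ufFind_root_eval k p1 a (-1) hga1' (by omega)
      have hrb1 : PvReach p1 b rb := (h1E b rb).mpr hrb
      obtain ⟨h2v, h2l, h2E⟩ := ufFind_spec p1.length p1 b rb hB0
        (pvReach_rootI_len p1 b rb hrb1)
      set p2 := (ufFind p1.length p1 b).1 with hp2
      have hE12 : ∀ x s, PvReach p2 x s ↔ PvReach p x s :=
        fun x s => (h2E x s).trans (h1E x s)
      have hlen2 : p2.length = p.length := h2l.trans h1l
      have hga2 : PySem.List.pyGet? p2 (a + (p.length : Int)) = some (-1) := by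
        rw [hp2]
        exact ufFind_keeps_neg p1.length p1 b hB0 (a + (p.length : Int)) (-1) (by omega)
          hga1 (by omega)
      have hga2' : PySem.List.pyGet? p2 a = some (-1) := by
        rw [pvGet_wrap _ a (by rw [hlen2]; exact hra.1) (by omega), hlen2]
        exact hga2
      have hrb2 : PvReach p2 b rb := (h2E b rb).mpr hrb1
      obtain ⟨srb, h0rb2, hgrb2, hsrb2⟩ := pvReach_root_spec p2 b rb hrb2
      have hgd_a : PySem.List.pyGetD p2 a 0 = -1 := by simp [PySem.List.pyGetD, hga2']
      have hgd_rb : PySem.List.pyGetD p2 rb 0 = srb := by simp [PySem.List.pyGetD, hgrb2]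
      -- the union: find a is the identity, find b returns rb, and a's size-1 cell loses
      have hunion : ufUnion p1 a b =
          PySem.List.pySetD (PySem.List.pySetD p2 rb (srb + -1)) a rb := by
        simp only [ufUnion, hfind_a1]
        rw [show ((p1, a).1.length) = p1.length from rfl]
        rw [show ufFind p1.length (p1, a).1 b = ufFind p1.length p1 b from rfl]
        rw [if_neg (by rw [h2v]; simpa using hanerb)]
        rw [show ((ufFind p1.length p1 b).1) = p2 from rfl, h2v]
        simp only [hgd_a, hgd_rb]
        rw [if_neg (by omega)]
      have hstepA : pvStepA (p, cnt) (a, b) =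
          (PySem.List.pySetD (PySem.List.pySetD p2 rb (srb + -1)) a rb, cnt + 1) := by
        simp only [pvStepA, hfind_a]
        rw [show ((p, a).1.length) = p.length from rfl]
        rw [show ufFind p.length (p, a).1 b = ufFind p.length p b from rfl]
        rw [if_pos (by rw [h1v]; simpa using hanerb)]
        rw [hunion]
      have hchA : ∀ r, GReach p a r ↔ r = a :=
        fun r => gReach_fresh_char p a (-1) r hga (by omega)
      have hcab : PySem.List.pyGetD comp a 0 ≠ PySem.List.pyGetD comp b 0 := by
        intro h
        obtain ⟨r, h1, h2⟩ := (hpair a hmemA b hmemB).mpr h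
        have e1 := (hchA r).mp h1
        have e2 := pvReach_det p b rb r hrb ((gReach_iff_pvReach p b r hB0).mp h2)
        omega
      have hstepB : pvStepB (comp, cnt) (a, b) =
          (comp.map (fun c => if c = PySem.List.pyGetD comp b 0
            then PySem.List.pyGetD comp a 0 else c), cnt + 1) := by
        simp only [pvStepB]
        rw [if_pos (by simpa using hcab)]
      rw [hstepA, hstepB]
      -- the two writes of the union
      have hlenw1 : (PySem.List.pySetD p2 rb (srb + -1)).length = p.length := by
        rw [PySem.List.length_pySetD, hlen2]
      have hrblt : rb.toNat < p2.length := by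
        have := pvIdx_lt p2 rb srb h0rb2 hgrb2
        omega
      have hpres1 := pv_set_neg p2 rb (srb + -1) srb h0rb2 hrblt hgrb2 hsrb2 (by omega)
      have hga_w1 : PySem.List.pyGet? (PySem.List.pySetD p2 rb (srb + -1))
          (a + (p.length : Int)) = some (-1) := by
        rw [pvGet_set p2 rb (srb + -1) (a + (p.length : Int)) h0rb2 hrblt (by omega),
          if_neg (by omega)]
        exact hga2
      have hw2 : PySem.List.pySetD (PySem.List.pySetD p2 rb (srb + -1)) a rb =
          PySem.List.pySetD (PySem.List.pySetD p2 rb (srb + -1))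
            (a + (p.length : Int)) rb := by
        have h := pvSetD_wrap (PySem.List.pySetD p2 rb (srb + -1)) a rb
          (by rw [hlenw1]; exact hra.1) (by omega)
        rw [hlenw1] at h
        exact h
      have havoid_w1 : ∀ x s, 0 ≤ x → x ≠ a + (p.length : Int) →
          PvReach (PySem.List.pySetD p2 rb (srb + -1)) x s →
          s ≠ a + (p.length : Int) := by
        intro x s hx0 hxne hr
        exact hfa_avoid x s hx0 hxne ((hE12 x s).mp ((hpres1 x s).mp hr))
      have hpresOff : ∀ x s, x ≠ a + (p.length : Int) →
          (PvReach (PySem.List.pySetD (PySem.List.pySetD p2 rb (srb + -1)) a rb) x s ↔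
            PvReach p x s) := by
        intro x s hxne
        rw [hw2]
        refine (pv_set_avoid (PySem.List.pySetD p2 rb (srb + -1)) (a + (p.length : Int))
          rb (-1) (by omega) (by rw [hlenw1]; omega) hga_w1 (by omega) havoid_w1 x s
          hxne).trans ?_
        exact (hpres1 x s).trans (hE12 x s)
      have hlenA : (PySem.List.pySetD (PySem.List.pySetD p2 rb (srb + -1)) a rb).length
          = p.length := by
        rw [PySem.List.length_pySetD, hlenw1]
      have hgrb_A : PySem.List.pyGet?
          (PySem.List.pySetD (PySem.List.pySetD p2 rb (srb + -1)) a rb) rb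
          = some (srb + -1) := by
        rw [hw2, pvGet_set _ (a + (p.length : Int)) rb rb (by omega)
          (by rw [hlenw1]; omega) h0rb2, if_neg hrbnea,
          pvGet_set p2 rb (srb + -1) rb h0rb2 hrblt h0rb2, if_pos rfl]
      have hreach_cell : PvReach
          (PySem.List.pySetD (PySem.List.pySetD p2 rb (srb + -1)) a rb)
          (a + (p.length : Int)) rb := by
        refine PvReach.step _ rb rb (by omega) ?_ h0rb2
          (PvReach.root rb (srb + -1) h0rb2 hgrb_A (by omega))
        rw [hw2, pvGet_set _ (a + (p.length : Int)) rb (a + (p.length : Int)) (by omega)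
          (by rw [hlenw1]; omega) (by omega), if_pos rfl]
      have hentry : ∀ v ∈ W, v < 0 →
          PySem.List.pyGet? (PySem.List.pySetD (PySem.List.pySetD p2 rb (srb + -1)) a rb)
            (v + (p.length : Int)) = some (-1) := by
        intro v hv hvneg
        have hvW := hrW v hv
        have hva : v ≠ a := fun h => absurd ((hok_aW v hv).1 h.symm) (by omega)
        have hbnev : b ≠ v + (p.length : Int) := by
          intro h
          exact (hok_bW v hv).2 (by omega) ⟨1, by omega⟩
        have hrbnev : rb ≠ v + (p.length : Int) :=
          (hfresh v (hmemW v hv) hvneg).2 b rb hB0 hbnev hrb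
        have e0 : PySem.List.pyGet? p2 (v + (p.length : Int)) = some (-1) := by
          rw [hp2]
          refine ufFind_keeps_neg p1.length p1 b hB0 _ (-1) (by omega) ?_ (by omega)
          rw [hp1]
          exact ufFind_keeps_neg p.length p b hB0 _ (-1) (by omega)
            (hfresh v (hmemW v hv) hvneg).1 (by omega)
        rw [hw2, pvGet_set _ (a + (p.length : Int)) rb (v + (p.length : Int)) (by omega)
          (by rw [hlenw1]; omega) (by omega), if_neg (by omega),
          pvGet_set p2 rb (srb + -1) (v + (p.length : Int)) h0rb2 hrblt (by omega),
          if_neg (fun h => hrbnev h.symm)]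
        exact e0
      have hGR : ∀ x ∈ W, ∀ r,
          GReach (PySem.List.pySetD (PySem.List.pySetD p2 rb (srb + -1)) a rb) x r ↔
            GReach p x r := by
        intro x hx r
        by_cases hx0 : 0 ≤ x
        · have hxne : x ≠ a + (p.length : Int) := by
            intro h
            have hxa : x ≠ a := by omega
            exact (hok_aW x hx).2 (fun hh => hxa hh.symm) ⟨-1, by omega⟩
          rw [gReach_iff_pvReach _ x r hx0, gReach_iff_pvReach _ x r hx0]
          exact hpresOff x r hxne
        · have hgx : PySem.List.pyGet? p x = some (-1) := by
            rw [pvGet_wrap p x (hrW x hx).1 (by omega)]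
            exact (hfresh x (hmemW x hx) (by omega)).1
          have hgx2 : PySem.List.pyGet?
              (PySem.List.pySetD (PySem.List.pySetD p2 rb (srb + -1)) a rb) x
              = some (-1) := by
            rw [pvGet_wrap _ x (by rw [hlenA]; exact (hrW x hx).1) (by omega), hlenA]
            exact hentry x hx (by omega)
          rw [gReach_fresh_char _ x (-1) r hgx2 (by omega),
            gReach_fresh_char _ x (-1) r hgx (by omega)]
      -- B relabels b's class to the label of a's fresh cell, which no remaining value bears
      have hnoca : ∀ y ∈ W, PySem.List.pyGetD comp y 0 ≠ PySem.List.pyGetD comp a 0 := by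
        intro y hy h
        obtain ⟨r, h1, h2⟩ := (hpair y (hmemW y hy) a hmemA).mpr h
        have e2 := (hchA r).mp h2
        subst e2
        by_cases hy0 : 0 ≤ y
        · have := pvReach_root_spec p y r ((gReach_iff_pvReach p y r hy0).mp h1)
          omega
        · have hgy : PySem.List.pyGet? p y = some (-1) := by
            rw [pvGet_wrap p y (hrW y hy).1 (by omega)]
            exact (hfresh y (hmemW y hy) (by omega)).1
          have := (gReach_fresh_char p y (-1) r hgy (by omega)).mp h1
          exact absurd ((hok_aW y hy).1 (by omega)) (by omega)
      have hcomp' : ∀ x ∈ W, ∀ y ∈ W,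
          (PySem.List.pyGetD (comp.map (fun c => if c = PySem.List.pyGetD comp b 0
            then PySem.List.pyGetD comp a 0 else c)) x 0 =
           PySem.List.pyGetD (comp.map (fun c => if c = PySem.List.pyGetD comp b 0
            then PySem.List.pyGetD comp a 0 else c)) y 0) ↔
          (PySem.List.pyGetD comp x 0 = PySem.List.pyGetD comp y 0) := by
        intro x hx y hy
        rw [pvGetD_map_wrap comp _ x (by rw [← hlen]; exact (hrW x hx).1)
          (by rw [← hlen]; exact (hrW x hx).2),
          pvGetD_map_wrap comp _ y (by rw [← hlen]; exact (hrW y hy).1)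
          (by rw [← hlen]; exact (hrW y hy).2)]
        exact pvRename_iff _ _ _ _ (hnoca x hx) (hnoca y hy)
      refine ⟨⟨by rw [hlenA, hlen]; simp, ?_, ?_, ?_⟩, hlenA, rfl⟩
      · intro x hx0 hx1
        rw [hlenA] at hx1
        by_cases hxc : x = a + (p.length : Int)
        · exact ⟨rb, hxc ▸ hreach_cell⟩
        · obtain ⟨r, hr⟩ := hwf x hx0 hx1
          exact ⟨r, (hpresOff x r hxc).mpr hr⟩
      · intro v hv hvneg
        rw [hlenA]
        refine ⟨hentry v hv hvneg, ?_⟩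
        intro x s hx0 hxne hr
        have hbnev : b ≠ v + (p.length : Int) := by
          intro h
          exact (hok_bW v hv).2 (by omega) ⟨1, by omega⟩
        have hrbnev : rb ≠ v + (p.length : Int) :=
          (hfresh v (hmemW v hv) hvneg).2 b rb hB0 hbnev hrb
        by_cases hxc : x = a + (p.length : Int)
        · rw [pvReach_det _ x s rb hr (hxc ▸ hreach_cell)]
          exact hrbnev
        · exact (hfresh v (hmemW v hv) hvneg).2 x s hx0 hxne ((hpresOff x s hxc).mp hr)
      · intro x hx y hy
        rw [hcomp' x hx y hy]
        refine Iff.trans ?_ (hpair x (hmemW x hx) y (hmemW y hy))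
        constructor
        · rintro ⟨r, h1, h2⟩
          exact ⟨r, (hGR x hx r).mp h1, (hGR y hy r).mp h2⟩
        · rintro ⟨r, h1, h2⟩
          exact ⟨r, (hGR x hx r).mpr h1, (hGR y hy r).mpr h2⟩
    · -- both endpoints negative (fresh); the edge always unites the two fresh cells
      obtain ⟨hfa_entry, hfa_avoid⟩ := hfresh a hmemA (by omega)
      obtain ⟨hfb_entry, hfb_avoid⟩ := hfresh b hmemB (by omega)
      have hga : PySem.List.pyGet? p a = some (-1) := by
        rw [pvGet_wrap p a hra.1 (by omega)]; exact hfa_entry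
      have hgb : PySem.List.pyGet? p b = some (-1) := by
        rw [pvGet_wrap p b hrb.1 (by omega)]; exact hfb_entry
      have hne : a ≠ b := fun h => absurd (hok_ab.1 h) (by omega)
      have hfind_a : ufFind p.length p a = (p, a) := by
        rw [hk]; exact ufFind_root_eval k p a (-1) hga (by omega)
      have hfind_b : ufFind p.length p b = (p, b) := by
        rw [hk]; exact ufFind_root_eval k p b (-1) hgb (by omega)
      -- A's step: a union of the two fresh cells, two writes of negative values
      have hunion : ufUnion p a b =
          PySem.List.pySetD (PySem.List.pySetD p b (-1 + -1)) a b := by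
        simp only [ufUnion, hfind_a]
        rw [show (p, a).1.length = p.length from rfl, hfind_b]
        rw [if_neg (by simpa using hne)]
        have hpa : PySem.List.pyGetD (p, b).1 a 0 = -1 := by
          simp [PySem.List.pyGetD, hga]
        have hpb : PySem.List.pyGetD (p, b).1 b 0 = -1 := by
          simp [PySem.List.pyGetD, hgb]
        simp only [hpa, hpb]
        rw [if_neg (by omega)]
      have hstepA : pvStepA (p, cnt) (a, b) =
          (PySem.List.pySetD (PySem.List.pySetD p b (-1 + -1)) a b, cnt + 1) := by
        simp only [pvStepA, hfind_a]
        rw [show (p, a).1.length = p.length from rfl, hfind_b]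
        rw [if_pos (by simpa using hne), hunion]
      -- characterizations of find's value from the two fresh indices
      have hchA : ∀ r, GReach p a r ↔ r = a := fun r => gReach_fresh_char p a (-1) r hga (by omega)
      have hchB : ∀ r, GReach p b r ↔ r = b := fun r => gReach_fresh_char p b (-1) r hgb (by omega)
      -- B's step: the labels of the two fresh cells are distinct, so B also counts
      have hcab : PySem.List.pyGetD comp a 0 ≠ PySem.List.pyGetD comp b 0 := by
        intro h
        obtain ⟨r, h1, h2⟩ := (hpair a hmemA b hmemB).mpr h
        exact hne (((hchA r).mp h1).symm.trans ((hchB r).mp h2))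
      have hstepB : pvStepB (comp, cnt) (a, b) =
          (comp.map (fun c => if c = PySem.List.pyGetD comp b 0
            then PySem.List.pyGetD comp a 0 else c), cnt + 1) := by
        simp only [pvStepB]
        rw [if_pos (by simpa using hcab)]
      rw [hstepA, hstepB]
      -- state after A's two writes: every reachability fact is unchanged
      have hbne : (b + (p.length : Int)) ≠ (a + (p.length : Int)) := by omega
      have hw1 : PySem.List.pySetD p b (-1 + -1) =
          PySem.List.pySetD p (b + (p.length : Int)) (-1 + -1) :=
        pvSetD_wrap p b _ hrb.1 (by omega)
      have hpres1 := pv_set_neg p (b + (p.length : Int)) (-1 + -1) (-1) (by omega)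
        (by omega) hfb_entry (by omega) (by omega)
      have hlen1 : (PySem.List.pySetD p b (-1 + -1)).length = p.length := by
        rw [PySem.List.length_pySetD]
      have hga1 : PySem.List.pyGet? (PySem.List.pySetD p b (-1 + -1))
          (a + (p.length : Int)) = some (-1) := by
        rw [hw1, pvGet_set p (b + (p.length : Int)) _ (a + (p.length : Int)) (by omega)
          (by omega) (by omega), if_neg (by omega)]
        exact hfa_entry
      have hw2 : PySem.List.pySetD (PySem.List.pySetD p b (-1 + -1)) a b =
          PySem.List.pySetD (PySem.List.pySetD p b (-1 + -1))
            (a + (p.length : Int)) b := by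
        have h := pvSetD_wrap (PySem.List.pySetD p b (-1 + -1)) a b
          (by rw [hlen1]; exact hra.1) (by omega)
        rw [hlen1] at h
        exact h
      have hpres2 := pv_set_neg (PySem.List.pySetD p b (-1 + -1))
        (a + (p.length : Int)) b (-1) (by omega) (by rw [hlen1]; omega) hga1
        (by omega) (by omega)
      have hpres : ∀ x s, PvReach (PySem.List.pySetD (PySem.List.pySetD p b (-1 + -1)) a b)
          x s ↔ PvReach p x s := by
        intro x s
        rw [hw2]
        refine (hpres2 x s).trans ?_
        rw [hw1]
        exact hpres1 x s
      have hlen2 : (PySem.List.pySetD (PySem.List.pySetD p b (-1 + -1)) a b).length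
          = p.length := by rw [PySem.List.length_pySetD, hlen1]
      -- cell entries of still-unused negative values are untouched
      have hentry : ∀ v ∈ W, v < 0 →
          PySem.List.pyGet? (PySem.List.pySetD (PySem.List.pySetD p b (-1 + -1)) a b)
            (v + (p.length : Int)) = some (-1) := by
        intro v hv hvneg
        have hva : v ≠ a := fun h => absurd ((hok_aW v hv).1 h.symm) (by omega)
        have hvb : v ≠ b := fun h => absurd ((hok_bW v hv).1 h.symm) (by omega)
        have hvW := hrW v hv
        have e1 : PySem.List.pyGet? (PySem.List.pySetD p b (-1 + -1))
            (v + (p.length : Int)) = some (-1) := by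
          rw [hw1, pvGet_set p (b + (p.length : Int)) (-1 + -1) (v + (p.length : Int))
            (by omega) (by omega) (by omega), if_neg (by omega)]
          exact (hfresh v (hmemW v hv) hvneg).1
        rw [hw2, pvGet_set (PySem.List.pySetD p b (-1 + -1)) (a + (p.length : Int)) b
          (v + (p.length : Int)) (by omega) (by rw [hlen1]; omega) (by omega),
          if_neg (by omega)]
        exact e1
      -- find's value from any still-relevant index is unchanged
      have hGR : ∀ x ∈ W, ∀ r,
          GReach (PySem.List.pySetD (PySem.List.pySetD p b (-1 + -1)) a b) x r ↔
            GReach p x r := by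
        intro x hx r
        by_cases hx0 : 0 ≤ x
        · rw [gReach_iff_pvReach _ x r hx0, gReach_iff_pvReach _ x r hx0]
          exact hpres x r
        · have hgx : PySem.List.pyGet? p x = some (-1) := by
            rw [pvGet_wrap p x (hrW x hx).1 (by omega)]
            exact (hfresh x (hmemW x hx) (by omega)).1
          have hgx2 : PySem.List.pyGet?
              (PySem.List.pySetD (PySem.List.pySetD p b (-1 + -1)) a b) x = some (-1) := by
            rw [pvGet_wrap _ x (by rw [hlen2]; exact (hrW x hx).1) (by omega), hlen2]
            exact hentry x hx (by omega)
          rw [gReach_fresh_char _ x (-1) r hgx2 (by omega),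
            gReach_fresh_char _ x (-1) r hgx (by omega)]
      -- B relabels only the label of b's fresh cell, which no remaining value bears
      have hcomp' : ∀ y ∈ W, PySem.List.pyGetD (comp.map (fun c =>
          if c = PySem.List.pyGetD comp b 0 then PySem.List.pyGetD comp a 0 else c)) y 0
          = PySem.List.pyGetD comp y 0 := by
        intro y hy
        rw [pvGetD_map_wrap comp _ y (by rw [← hlen]; exact (hrW y hy).1)
          (by rw [← hlen]; exact (hrW y hy).2)]
        rw [if_neg ?_]
        intro h
        obtain ⟨r, h1, h2⟩ := (hpair y (hmemW y hy) b hmemB).mpr h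
        have hyb : y ≠ b := fun hh => absurd ((hok_bW y hy).1 hh.symm) (by omega)
        have e2 := (hchB r).mp h2
        subst e2
        by_cases hy0 : 0 ≤ y
        · have := pvReach_root_spec p y r ((gReach_iff_pvReach p y r hy0).mp h1)
          omega
        · have hgy : PySem.List.pyGet? p y = some (-1) := by
            rw [pvGet_wrap p y (hrW y hy).1 (by omega)]
            exact (hfresh y (hmemW y hy) (by omega)).1
          exact hyb ((gReach_fresh_char p y (-1) r hgy (by omega)).mp h1).symm
      refine ⟨⟨by rw [hlen2, hlen]; simp, ?_, ?_, ?_⟩, hlen2, rfl⟩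
      · intro x hx0 hx1
        rw [hlen2] at hx1
        obtain ⟨r, hr⟩ := hwf x hx0 hx1
        exact ⟨r, (hpres x r).mpr hr⟩
      · intro v hv hvneg
        rw [hlen2]
        refine ⟨hentry v hv hvneg, ?_⟩
        intro x s hx0 hxne hr
        exact (hfresh v (hmemW v hv) hvneg).2 x s hx0 hxne ((hpres x s).mp hr)
      · intro x hx y hy
        rw [hcomp' x hx, hcomp' y hy]
        refine Iff.trans ?_ (hpair x (hmemW x hx) y (hmemW y hy))
        constructor
        · rintro ⟨r, h1, h2⟩
          exact ⟨r, (hGR x hx r).mp h1, (hGR y hy r).mp h2⟩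
        · rintro ⟨r, h1, h2⟩
          exact ⟨r, (hGR x hx r).mpr h1, (hGR y hy r).mpr h2⟩

theorem pv_initW (n : Int) (W : List Int)
    (hrng : ∀ v ∈ W, -(n+1) ≤ v ∧ v ≤ n)
    (hok : W.Pairwise (PvOk (n+1))) :
    PvRelW ((PySem.List.pyRange 0 (n+1) 1).map (fun _ => (-1 : Int)))
      (PySem.List.pyRange 0 (n+1) 1) W := by
  have hlen : (((PySem.List.pyRange 0 (n+1) 1).map (fun _ => (-1 : Int))).length : Int)
      = ((n + 1 - 0).toNat : Int) := by
    rw [List.length_map, PySem.List.length_pyRange_one]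
  have hget : ∀ x : Int, 0 ≤ x →
      x < (((PySem.List.pyRange 0 (n+1) 1).map (fun _ => (-1 : Int))).length : Int) →
      PySem.List.pyGet? ((PySem.List.pyRange 0 (n+1) 1).map (fun _ => (-1 : Int))) x
        = some (-1) := by
    intro x hx0 hx1
    rw [PySem.List.pyGet?_of_nonneg _ hx0, List.getElem?_eq_getElem (by omega)]
    simp
  have hgetW : ∀ x : Int,
      -(((PySem.List.pyRange 0 (n+1) 1).map (fun _ => (-1 : Int))).length : Int) ≤ x →
      x < (((PySem.List.pyRange 0 (n+1) 1).map (fun _ => (-1 : Int))).length : Int) →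
      PySem.List.pyGet? ((PySem.List.pyRange 0 (n+1) 1).map (fun _ => (-1 : Int))) x
        = some (-1) := by
    intro x hx0 hx1
    by_cases hx : 0 ≤ x
    · exact hget x hx hx1
    · rw [pvGet_wrap _ x hx0 (by omega)]
      exact hget _ (by omega) (by omega)
  have hbnd : ∀ v ∈ W, -((((PySem.List.pyRange 0 (n+1) 1).map
        (fun _ => (-1 : Int))).length : Int)) ≤ v ∧
      v < (((PySem.List.pyRange 0 (n+1) 1).map (fun _ => (-1 : Int))).length : Int) := by
    intro v hv
    have h1 := hrng v hv
    rw [hlen]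
    omega
  have hc : ∀ x : Int, 0 ≤ x →
      x < (((PySem.List.pyRange 0 (n+1) 1).map (fun _ => (-1 : Int))).length : Int) →
      PySem.List.pyGetD (PySem.List.pyRange 0 (n+1) 1) x 0 = x := by
    intro x hx0 hx1
    rw [hlen] at hx1
    rw [PySem.List.pyGetD_of_nonneg _ _ hx0, List.getD_eq_getElem?_getD,
      List.getElem?_eq_getElem (by rw [PySem.List.length_pyRange_one]; omega)]
    rw [PySem.List.getElem_pyRange_one]
    simp
    omega
  have hcW : ∀ x : Int,
      -(((PySem.List.pyRange 0 (n+1) 1).map (fun _ => (-1 : Int))).length : Int) ≤ x →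
      x < (((PySem.List.pyRange 0 (n+1) 1).map (fun _ => (-1 : Int))).length : Int) →
      PySem.List.pyGetD (PySem.List.pyRange 0 (n+1) 1) x 0 =
        (if x < 0 then
          x + (((PySem.List.pyRange 0 (n+1) 1).map (fun _ => (-1 : Int))).length : Int)
        else x) := by
    intro x hx0 hx1
    by_cases hx : 0 ≤ x
    · rw [if_neg (by omega)]
      exact hc x hx hx1
    · rw [if_pos (by omega)]
      unfold PySem.List.pyGetD
      rw [pvGet_wrap _ x (by simpa using hx0) (by omega)]
      have := hc (x + (((PySem.List.pyRange 0 (n+1) 1).map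
        (fun _ => (-1 : Int))).length : Int)) (by omega) (by omega)
      unfold PySem.List.pyGetD at this
      rw [← this]
      congr 2
      simp
  have hsym : ∀ x ∈ W, ∀ y ∈ W, x ≠ y → PvOk (n+1) x y ∨ PvOk (n+1) y x := by
    have hs : (W.Pairwise (fun u v => PvOk (n+1) u v ∨ PvOk (n+1) v u)) :=
      hok.imp Or.inl
    intro x hx y hy hne
    exact List.Pairwise.forall (fun u v h => h.elim Or.inr Or.inl) hs hx hy hne
  refine ⟨by simp, ?_, ?_, ?_⟩
  · intro x hx0 hx1
    exact ⟨x, PvReach.root x (-1) hx0 (hget x hx0 hx1) (by omega)⟩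
  · intro v hv hvneg
    obtain ⟨hb1, hb2⟩ := hbnd v hv
    refine ⟨hgetW _ (by omega) (by omega), ?_⟩
    intro x s hx0 hxne hr
    rw [pv_init_reach n x s hr]
    exact hxne
  · intro x hx y hy
    obtain ⟨hbx1, hbx2⟩ := hbnd x hx
    obtain ⟨hby1, hby2⟩ := hbnd y hy
    rw [hcW x hbx1 hbx2, hcW y hby1 hby2]
    by_cases hxy : x = y
    · subst hxy
      constructor
      · intro _; rfl
      · intro _
        exact ⟨x, (gReach_fresh_char _ x (-1) x (hgetW x hbx1 hbx2) (by omega)).mpr rfl,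
          (gReach_fresh_char _ x (-1) x (hgetW x hbx1 hbx2) (by omega)).mpr rfl⟩
    · have hn0 : 0 ≤ n := by have := hrng x hx; have := hrng y hy; omega
      have hLI : (((PySem.List.pyRange 0 (n+1) 1).map (fun _ => (-1 : Int))).length : Int)
          = n + 1 := by rw [hlen]; omega
      have hcells : (if x < 0 then x + (n+1) else x) ≠ (if y < 0 then y + (n+1) else y) := by
        rcases hsym x hx y hy hxy with h | h
        · exact pvOk_cells (n+1) x y (by omega) (by have := hrng x hx; omega)
            (by have := hrng x hx; omega) (by have := hrng y hy; omega)
            (by have := hrng y hy; omega) h hxy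
        · exact fun hh => (pvOk_cells (n+1) y x (by omega) (by have := hrng y hy; omega)
            (by have := hrng y hy; omega) (by have := hrng x hx; omega)
            (by have := hrng x hx; omega) h (Ne.symm hxy)) hh.symm
      constructor
      · rintro ⟨r, hr1, hr2⟩
        have e1 := (gReach_fresh_char _ x (-1) r (hgetW x hbx1 hbx2) (by omega)).mp hr1
        have e2 := (gReach_fresh_char _ y (-1) r (hgetW y hby1 hby2) (by omega)).mp hr2
        omega
      · intro h
        rw [hLI] at h
        exact absurd h hcells

theorem pv_foldW (airs : List (Int × Int)) :
    ∀ (p comp : List Int) (cnt : Int),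
      PvRelW p comp (pvVals airs) →
      (∀ v ∈ pvVals airs, -(p.length : Int) ≤ v ∧ v < p.length) →
      (pvVals airs).Pairwise (PvOk p.length) →
      (airs.foldl pvStepA (p, cnt)).2 = (airs.foldl pvStepB (comp, cnt)).2 := by
  induction airs with
  | nil => intro p comp cnt _ _ _; rfl
  | cons ab t ih =>
    intro p comp cnt hrel hrng hok
    obtain ⟨a, b⟩ := ab
    have hvals : pvVals ((a, b) :: t) = a :: b :: pvVals t := rfl
    rw [hvals] at hrel hrng hok
    rw [List.pairwise_cons] at hok
    obtain ⟨hokA, hok⟩ := hok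
    rw [List.pairwise_cons] at hok
    obtain ⟨hokB, hok⟩ := hok
    have hstep := pv_stepW p comp (pvVals t) cnt a b hrel
      (hrng a (by simp)) (hrng b (by simp))
      (fun w hw => hrng w (by simp [hw]))
      (hokA b (by simp)) (fun w hw => hokA w (by simp [hw])) hokB
    rw [List.foldl_cons, List.foldl_cons]
    rcases hA : pvStepA (p, cnt) (a, b) with ⟨p', c'⟩
    rcases hB : pvStepB (comp, cnt) (a, b) with ⟨comp', c''⟩
    rw [hA, hB] at hstep
    obtain ⟨hrel', hlen', hcnt'⟩ := hstep
    simp only at hrel' hlen' hcnt'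
    subst hcnt'
    refine ih p' comp' c' hrel' ?_ ?_
    · intro v hv
      have := hrng v (by simp [hv])
      rw [hlen']
      exact this
    · rw [hlen']
      exact hok

-- ===== VERDICT (by name: the statement is the Claim_ definition above) =====
theorem solution_spec : Claim_equal_solution := by
  intro n m airs _ hpre
  obtain ⟨hrng, hok⟩ := hpre
  show solution n m airs = solution_alt n m airs
  show (airs.foldl pvStepA ((PySem.List.pyRange 0 (n+1) 1).map (fun _ => (-1 : Int)), 0)).2
    = (airs.foldl pvStepB (PySem.List.pyRange 0 (n+1) 1, 0)).2
  have hlen : (((PySem.List.pyRange 0 (n+1) 1).map (fun _ => (-1 : Int))).length : Int)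
      = if 0 ≤ n then n + 1 else 0 := by
    rw [List.length_map, PySem.List.length_pyRange_one]
    split_ifs <;> omega
  have hn : ∀ v ∈ pvVals airs, 0 ≤ n := by
    intro v hv
    have := hrng v hv
    omega
  refine pv_foldW airs _ _ 0 (pv_initW n (pvVals airs) hrng ?_) ?_ ?_
  · exact hok
  · intro v hv
    have h1 := hrng v hv
    have h2 := hn v hv
    rw [hlen, if_pos h2]
    omega
  · refine hok.imp_of_mem ?_
    intro u v hu hv h
    have h2 := hn u hu
    rw [hlen, if_pos h2]
    exact h
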